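-- pv_equiv track=rewrite | github.com/leba01/turnzero | turnzero/splits/cluster.py | core_cluster_teams
-- ===== SOURCE A (Python) =====
-- from collections import defaultdict
-- from itertools import combinations
--
-- class UnionFind:
--     """Disjoint-set / union-find with path compression and union by rank."""
--
--     def __init__(self) -> None:
--         self._parent: dict[str, str] = {}
--         self._rank: dict[str, int] = {}
--
--     def add(self, x: str) -> None:
--         if x not in self._parent:
--             self._parent[x] = x
--             self._rank[x] = 0
--
--     def find(self, x: str) -> str:
--         root = x
--         while self._parent[root] != root:
--             root = self._parent[root]
--         # Path compression
--         while self._parent[x] != root: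
--             self._parent[x], x = root, self._parent[x]
--         return root
--
--     def union(self, a: str, b: str) -> None:
--         ra, rb = self.find(a), self.find(b)
--         if ra == rb:
--             return
--         # Union by rank
--         if self._rank[ra] < self._rank[rb]:
--             ra, rb = rb, ra
--         self._parent[rb] = ra
--         if self._rank[ra] == self._rank[rb]:
--             self._rank[ra] += 1
--
--     def __contains__(self, x: str) -> bool:
--         return x in self._parent
--
-- def core_cluster_teams(
--     team_species: dict[str, list[str]],
-- ) -> dict[str, str]:
--     """Assign each team to a core cluster via ≥4/6 species overlap.
--
--     Args:
--         team_species: mapping of team_id → sorted list of 6 species names.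
--
--     Returns:
--         Mapping of team_id → cluster_id (deterministic string labels).
--
--     Algorithm:
--         For each team, enumerate all C(6,4)=15 subsets of 4 species.
--         Build an inverted index: 4-species-tuple → list of team_ids.
--         For each collision in the index, union the teams.
--         Connected components become clusters.
--     """
--     uf = UnionFind()
--     index: dict[tuple[str, ...], list[str]] = defaultdict(list)
--
--     for team_id, species6 in team_species.items():
--         uf.add(team_id)
--         for comb4 in combinations(sorted(species6), 4):
--             key = comb4
--             for other_id in index[key]:
--                 uf.union(team_id, other_id)
--             index[key].append(team_id)
--
--     # Assign deterministic cluster labels (sorted by first team_id seen)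
--     root_to_cluster: dict[str, str] = {}
--     clusters: dict[str, str] = {}
--     # Sort team_ids for deterministic cluster numbering
--     for team_id in sorted(team_species.keys()):
--         root = uf.find(team_id)
--         if root not in root_to_cluster:
--             root_to_cluster[root] = f"cluster_{len(root_to_cluster)}"
--         clusters[team_id] = root_to_cluster[root]
--
--     return clusters
-- ===== SOURCE B (Python) =====
-- from itertools import combinations
--
--
-- def core_cluster_teams(team_species):
--     # Graph traversal instead of union-find: build the 4-species key buckets
--     # once, then label connected components by an explicit-stack depth-first
--     # search, visiting teams in sorted order.
--     keys_of = {}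
--     bucket = {}
--     for team, species in team_species.items():
--         ks = list(combinations(sorted(species), 4))
--         keys_of[team] = ks
--         for k in ks:
--             bucket.setdefault(k, []).append(team)
--     comp = {}
--     n = 0
--     for team in sorted(team_species):
--         if team in comp:
--             continue
--         label = f"cluster_{n}"
--         n += 1
--         comp[team] = label
--         stack = [team]
--         while stack:
--             t = stack.pop()
--             for k in keys_of[t]:
--                 for v in bucket[k]:
--                     if v not in comp:
--                         comp[v] = label
--                         stack.append(v)
--     return {team: comp[team] for team in sorted(team_species)}
-- ===== Notes on version B (the rewrite author's own statement) =====
-- stated objective: alternative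
-- what changed: Replaces the union-find (path compression + union by rank, unioning on every key collision) by a two-phase graph algorithm: first build the 4-species-key buckets, then label connected components with an explicit-stack depth-first search over the bucket graph, visiting teams in sorted order.
import Mathlib
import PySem

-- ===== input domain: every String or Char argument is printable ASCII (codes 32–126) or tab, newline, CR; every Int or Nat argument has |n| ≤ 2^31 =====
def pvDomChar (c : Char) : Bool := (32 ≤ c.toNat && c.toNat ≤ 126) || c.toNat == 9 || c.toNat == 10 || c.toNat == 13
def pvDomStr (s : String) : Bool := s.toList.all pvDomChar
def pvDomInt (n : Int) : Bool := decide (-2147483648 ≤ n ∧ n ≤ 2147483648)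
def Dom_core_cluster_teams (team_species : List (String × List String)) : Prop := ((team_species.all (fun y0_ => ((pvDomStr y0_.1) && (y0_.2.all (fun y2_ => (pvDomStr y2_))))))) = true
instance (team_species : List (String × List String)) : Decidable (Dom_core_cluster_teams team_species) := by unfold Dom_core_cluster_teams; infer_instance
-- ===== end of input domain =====

-- B replaces A's union-find (path compression + union by rank, unioning on every
-- key collision) by a two-phase graph algorithm: build the 4-species-key buckets
-- once, then label connected components by an explicit-stack depth-first search.

-- ===== PORT A =====

-- itertools.combinations(xs, k): k-subsets in lexicographic index order (shared helper; both Pythons call the library function)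
def pvComb {α : Type} : Nat → List α → List (List α)
  | 0, _ => [[]]
  | _ + 1, [] => []
  | k + 1, x :: xs => ((pvComb k xs).map (fun t => x :: t)) ++ pvComb (k + 1) xs

-- fuel bound for the two while-loops of UnionFind.find: ranks strictly increase
-- along parent chains, so (sum of all ranks) + 1 steps always suffice (proved below)
def pvSumRk (rk : PySem.Dict String Nat) : Nat := ((PySem.Dict.items rk).map (fun q => q.2)).sum

-- first loop of UnionFind.find: follow parents to the root
def pvFindRoot (p : PySem.Dict String String) : Nat → String → String
  | 0, x => x
  | fuel + 1, x =>
    match PySem.Dict.get? p x with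
    | none => x
    | some y => if y = x then x else pvFindRoot p fuel y

-- second loop of UnionFind.find: path compression
def pvCompress (root : String) : Nat → PySem.Dict String String → String → PySem.Dict String String
  | 0, p, _ => p
  | fuel + 1, p, x =>
    match PySem.Dict.get? p x with
    | none => p
    | some y => if y = root then p else pvCompress root fuel (PySem.Dict.insert p x root) y

-- UnionFind.find (returns the root and the compressed parent map)
def pvFind (p : PySem.Dict String String) (rk : PySem.Dict String Nat) (x : String) :
    String × PySem.Dict String String :=
  let fuel := pvSumRk rk + 1
  (pvFindRoot p fuel x, pvCompress (pvFindRoot p fuel x) fuel p x)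

-- UnionFind.union
def pvUnion (p : PySem.Dict String String) (rk : PySem.Dict String Nat) (a b : String) :
    PySem.Dict String String × PySem.Dict String Nat :=
  let f1 := pvFind p rk a
  let f2 := pvFind f1.2 rk b
  let ra := f1.1
  let rb := f2.1
  if ra = rb then (f2.2, rk)
  else
    let ra' := if PySem.Dict.getD rk ra 0 < PySem.Dict.getD rk rb 0 then rb else ra
    let rb' := if PySem.Dict.getD rk ra 0 < PySem.Dict.getD rk rb 0 then ra else rb
    (PySem.Dict.insert f2.2 rb' ra',
     if PySem.Dict.getD rk ra' 0 = PySem.Dict.getD rk rb' 0 then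
       PySem.Dict.insert rk ra' (PySem.Dict.getD rk ra' 0 + 1)
     else rk)

-- UnionFind.add
def pvAdd (p : PySem.Dict String String) (rk : PySem.Dict String Nat) (x : String) :
    PySem.Dict String String × PySem.Dict String Nat :=
  if PySem.Dict.contains p x then (p, rk)
  else (PySem.Dict.insert p x x, PySem.Dict.insert rk x 0)

def core_cluster_teams (team_species : List (String × List String)) : List (String × String) :=
  let st := team_species.foldl
    (fun (st : PySem.Dict String String × PySem.Dict String Nat × PySem.Dict (List String) (List String)) pr =>
      let a := pvAdd st.1 st.2.1 pr.1
      (pvComb 4 (PySem.List.sorted pr.2 (fun s => s) false)).foldl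
        (fun st2 key =>
          let cur := PySem.Dict.getD st2.2.2 key []
          let pu := cur.foldl (fun (q : PySem.Dict String String × PySem.Dict String Nat) other =>
            pvUnion q.1 q.2 pr.1 other) (st2.1, st2.2.1)
          (pu.1, pu.2, PySem.Dict.modify st2.2.2 key [] (fun l => l ++ [pr.1])))
        (a.1, a.2, st.2.2))
    (PySem.Dict.empty, PySem.Dict.empty, PySem.Dict.empty)
  let fin := (PySem.List.sorted (team_species.map (fun q => q.1)) (fun s => s) false).foldl
    (fun (st2 : PySem.Dict String String × PySem.Dict String String × PySem.Dict String String) team =>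
      let f := pvFind st2.1 st.2.1 team
      let rtc := if PySem.Dict.contains st2.2.1 f.1 then st2.2.1
                 else PySem.Dict.insert st2.2.1 f.1 ("cluster_" ++ PySem.Int.toStr (PySem.Dict.size st2.2.1 : Int))
      (f.2, rtc, PySem.Dict.insert st2.2.2 team (PySem.Dict.getD rtc f.1 "")))
    (st.1, PySem.Dict.empty, PySem.Dict.empty)
  PySem.Dict.items fin.2.2

-- ===== PORT B =====

-- the two inner 'for' loops of the while body: scan the buckets of t's keys,
-- pushing every yet-unlabelled team (the Python stack's top is the list head here)
def pvScan (keysOf : PySem.Dict String (List (List String)))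
    (bucket : PySem.Dict (List String) (List String)) (label t : String)
    (st : List String × PySem.Dict String String) : List String × PySem.Dict String String :=
  (PySem.Dict.getD keysOf t []).foldl (fun st2 k =>
    (PySem.Dict.getD bucket k []).foldl (fun st3 v =>
      if PySem.Dict.contains st3.2 v then st3
      else (v :: st3.1, PySem.Dict.insert st3.2 v label)) st2) st
  -- dict[k] lookups ported as getD with default []: the keys are always present here

-- the 'while stack:' loop, with a fuel bound (each pop either empties the stack or
-- followed pushes that added new comp entries; teams+1 steps suffice, proved below)
def pvBfs (keysOf : PySem.Dict String (List (List String)))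
    (bucket : PySem.Dict (List String) (List String)) (label : String) :
    Nat → List String → PySem.Dict String String → PySem.Dict String String
  | 0, _, comp => comp
  | _ + 1, [], comp => comp
  | fuel + 1, t :: rest, comp =>
    let s := pvScan keysOf bucket label t (rest, comp)
    pvBfs keysOf bucket label fuel s.1 s.2

def core_cluster_teams_alt (team_species : List (String × List String)) : List (String × String) :=
  let p1 := team_species.foldl
    (fun (st : PySem.Dict String (List (List String)) × PySem.Dict (List String) (List String)) pr =>
      let ks := pvComb 4 (PySem.List.sorted pr.2 (fun s => s) false)
      (PySem.Dict.insert st.1 pr.1 ks,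
       ks.foldl (fun b k => PySem.Dict.modify b k [] (fun l2 => l2 ++ [pr.1])) st.2))
    (PySem.Dict.empty, PySem.Dict.empty)
  let fin := (PySem.List.sorted (team_species.map (fun q => q.1)) (fun s => s) false).foldl
    (fun (st : Nat × PySem.Dict String String) team =>
      if PySem.Dict.contains st.2 team then st
      else
        let label := "cluster_" ++ PySem.Int.toStr (st.1 : Int)
        (st.1 + 1,
         pvBfs p1.1 p1.2 label (team_species.length + 1) [team]
           (PySem.Dict.insert st.2 team label)))
    (0, PySem.Dict.empty)
  (PySem.List.sorted (team_species.map (fun q => q.1)) (fun s => s) false).map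
    (fun team => (team, PySem.Dict.getD fin.2 team ""))

-- ===== PRECONDITION & SPEC =====
-- Pre_ excludes association lists with duplicate team ids: they do not represent a
-- Python dict argument (dict keys are unique), so neither Python can receive them.
def Pre_core_cluster_teams (team_species : List (String × List String)) : Prop :=
  (team_species.map (fun q => q.1)).Nodup

instance (team_species : List (String × List String)) : Decidable (Pre_core_cluster_teams team_species) := by
  unfold Pre_core_cluster_teams; infer_instance

def pvWitness_core_cluster_teams : (List (String × List String)) :=
  [("t1", ["a", "b", "c", "d", "e", "f"]), ("t2", ["a", "b", "c", "d", "x", "y"])]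

def Spec_core_cluster_teams (team_species : List (String × List String)) (out : List (String × String)) : Prop := out = core_cluster_teams_alt team_species
instance (team_species : List (String × List String)) (out : List (String × String)) : Decidable (Spec_core_cluster_teams team_species out) := by unfold Spec_core_cluster_teams; infer_instance

-- ===== CLAIM (what is proved, stated in full; the proofs are below) =====
def Claim_equal_core_cluster_teams : Prop := ∀ (team_species : List (String × List String)), Dom_core_cluster_teams team_species → Pre_core_cluster_teams team_species → Spec_core_cluster_teams team_species (core_cluster_teams team_species)

-- ===== LEMMAS AND PROOFS =====

-- Chains in the parent map: PvRootN p n x r = "from x, following parents n steps reaches the root r"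
inductive PvRootN (p : PySem.Dict String String) : Nat → String → String → Prop
  | zero (r : String) : PySem.Dict.get? p r = some r → PvRootN p 0 r r
  | succ {x y r : String} {n : Nat} :
      PySem.Dict.get? p x = some y → y ≠ x → PvRootN p n y r → PvRootN p (n + 1) x r

def PvRoot (p : PySem.Dict String String) (x r : String) : Prop := ∃ n, PvRootN p n x r

def PvEqv (p : PySem.Dict String String) (x y : String) : Prop :=
  ∃ r, PvRoot p x r ∧ PvRoot p y r

-- the union-find invariant: parent edges stay inside the map, every node has a rank,
-- and ranks strictly increase along proper parent edges
def PvUF (p : PySem.Dict String String) (rk : PySem.Dict String Nat) : Prop :=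
  ∀ x y, PySem.Dict.get? p x = some y →
    PySem.Dict.contains p y = true ∧ PySem.Dict.contains rk x = true ∧
    (y ≠ x → PySem.Dict.getD rk x 0 < PySem.Dict.getD rk y 0)

theorem pvRootN_root {p : PySem.Dict String String} {n : Nat} {x r : String}
    (h : PvRootN p n x r) : PySem.Dict.get? p r = some r := by
  induction h with
  | zero _ hr => exact hr
  | succ _ _ _ ih => exact ih

theorem pvRootN_start {p : PySem.Dict String String} {n : Nat} {x r : String}
    (h : PvRootN p n x r) : ∃ w, PySem.Dict.get? p x = some w := by
  cases h with
  | zero _ hr => exact ⟨_, hr⟩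
  | succ hxy _ _ => exact ⟨_, hxy⟩

theorem pvRootN_det {p : PySem.Dict String String} {n m : Nat} {x r s : String}
    (h1 : PvRootN p n x r) (h2 : PvRootN p m x s) : r = s := by
  induction h1 generalizing m s with
  | zero r hr =>
    cases h2 with
    | zero _ _ => rfl
    | succ hxy hne _ => rw [hr] at hxy; cases hxy; exact absurd rfl hne
  | succ hxy hne htail ih =>
    cases h2 with
    | zero _ hr => rw [hr] at hxy; cases hxy; exact absurd rfl hne
    | succ hxy' hne' htail' =>
      rw [hxy] at hxy'; cases hxy'; exact ih htail'

theorem pvRoot_det {p : PySem.Dict String String} {x r s : String}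
    (h1 : PvRoot p x r) (h2 : PvRoot p x s) : r = s := by
  obtain ⟨n, h1⟩ := h1; obtain ⟨m, h2⟩ := h2; exact pvRootN_det h1 h2

theorem pvRoot_refl_of_root {p : PySem.Dict String String} {r : String}
    (h : PySem.Dict.get? p r = some r) : PvRoot p r r := ⟨0, PvRootN.zero r h⟩

theorem pvEqv_symm {p : PySem.Dict String String} {x y : String} (h : PvEqv p x y) :
    PvEqv p y x := by obtain ⟨r, h1, h2⟩ := h; exact ⟨r, h2, h1⟩

theorem pvEqv_trans {p : PySem.Dict String String} {x y z : String}
    (h1 : PvEqv p x y) (h2 : PvEqv p y z) : PvEqv p x z := by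
  obtain ⟨r, hx, hy⟩ := h1; obtain ⟨s, hy', hz⟩ := h2
  have : r = s := pvRoot_det hy hy'
  exact ⟨r, hx, this ▸ hz⟩

-- rank strictly increases along a chain
theorem pvChain_rank {p : PySem.Dict String String} {rk : PySem.Dict String Nat}
    {n : Nat} {x r : String} (huf : PvUF p rk) (h : PvRootN p n x r) :
    PySem.Dict.getD rk x 0 + n ≤ PySem.Dict.getD rk r 0 := by
  induction h with
  | zero r hr => omega
  | succ hxy hne htail ih =>
    have := (huf _ _ hxy).2.2 hne
    omega

theorem pvRk_le_sum {rk : PySem.Dict String Nat} {x : String}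
    (h : PySem.Dict.contains rk x = true) : PySem.Dict.getD rk x 0 ≤ pvSumRk rk := by
  rw [PySem.Dict.contains_eq_isSome_get?] at h
  obtain ⟨v, hv⟩ := Option.isSome_iff_exists.mp h
  rw [PySem.Dict.getD_eq_get?_getD, hv]
  show v ≤ _
  have hmem : (x, v) ∈ PySem.Dict.items rk := PySem.Dict.mem_items_of_get?_eq_some rk hv
  have : v ∈ (PySem.Dict.items rk).map (fun q => q.2) := List.mem_map.mpr ⟨(x, v), hmem, rfl⟩
  exact List.single_le_sum (fun _ _ => Nat.zero_le _) _ this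

theorem pvRootN_lt_fuel {p : PySem.Dict String String} {rk : PySem.Dict String Nat}
    {n : Nat} {x r : String} (huf : PvUF p rk) (h : PvRootN p n x r) :
    n < pvSumRk rk + 1 := by
  have h1 := pvChain_rank huf h
  have h2 := (huf _ _ (pvRootN_root h)).2.1
  have h3 := pvRk_le_sum h2
  omega

theorem pvRoot_total {p : PySem.Dict String String} {rk : PySem.Dict String Nat}
    (huf : PvUF p rk) {x : String} (hx : PySem.Dict.contains p x = true) :
    ∃ r, PvRoot p x r := by
  have key : ∀ m x, PySem.Dict.contains p x = true →
      pvSumRk rk + 1 - PySem.Dict.getD rk x 0 ≤ m → ∃ r, PvRoot p x r := by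
    intro m
    induction m with
    | zero =>
      intro x hx hle
      rw [PySem.Dict.contains_eq_isSome_get?] at hx
      obtain ⟨y, hy⟩ := Option.isSome_iff_exists.mp hx
      have hrk := (huf _ _ hy).2.1
      have := pvRk_le_sum hrk
      omega
    | succ m ih =>
      intro x hx hle
      rw [PySem.Dict.contains_eq_isSome_get?] at hx
      obtain ⟨y, hy⟩ := Option.isSome_iff_exists.mp hx
      by_cases hyx : y = x
      · subst hyx; exact ⟨y, pvRoot_refl_of_root hy⟩
      · obtain ⟨hcy, hrkx, hlt⟩ := huf _ _ hy
        have hlt := hlt hyx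
        obtain ⟨r, nr, hchain⟩ := ih y hcy (by omega)
        exact ⟨r, nr + 1, PvRootN.succ hy hyx hchain⟩
  exact key (pvSumRk rk + 1) x hx (by omega)

theorem pvFindRoot_correct {p : PySem.Dict String String} {n : Nat} {x r : String}
    (h : PvRootN p n x r) : ∀ fuel, n < fuel → pvFindRoot p fuel x = r := by
  induction h with
  | zero r hr =>
    intro fuel hf
    match fuel, hf with
    | f + 1, _ => simp [pvFindRoot, hr]
  | succ hxy hne htail ih =>
    intro fuel hf
    match fuel, hf with
    | f + 1, hf =>
      simp only [pvFindRoot, hxy]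
      rw [if_neg hne]
      exact ih f (by omega)

-- inserting a shortcut x ↦ r (r the root of x) preserves all roots
theorem pvShortcut_fwd {p : PySem.Dict String String} {x r : String} (hxr : PvRoot p x r)
    {z s : String} (h : PvRoot p z s) : PvRoot (PySem.Dict.insert p x r) z s := by
  obtain ⟨n, h⟩ := h
  induction h with
  | zero s hs =>
    by_cases hsx : s = x
    · subst hsx
      have : r = s := pvRoot_det hxr (pvRoot_refl_of_root hs)
      subst this
      exact pvRoot_refl_of_root (by rw [PySem.Dict.get?_insert]; simp)
    · exact pvRoot_refl_of_root (by rw [PySem.Dict.get?_insert, if_neg hsx]; exact hs)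
  | @succ x' y' r' n' hxy hne htail ih =>
    by_cases hzx : x' = x
    · subst hzx
      have hs : r' = r := pvRoot_det ⟨_, PvRootN.succ hxy hne htail⟩ hxr
      subst hs
      have hself : PySem.Dict.get? (PySem.Dict.insert p x' r') x' = some r' := by
        rw [PySem.Dict.get?_insert]; simp
      by_cases hrx : r' = x'
      · subst hrx; exact pvRoot_refl_of_root hself
      · have hroot : PySem.Dict.get? (PySem.Dict.insert p x' r') r' = some r' := by
          rw [PySem.Dict.get?_insert, if_neg hrx]; exact pvRootN_root htail
        exact ⟨1, PvRootN.succ hself hrx (PvRootN.zero r' hroot)⟩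
    · obtain ⟨m, htail'⟩ := ih
      exact ⟨m + 1, PvRootN.succ (by rw [PySem.Dict.get?_insert, if_neg hzx]; exact hxy) hne htail'⟩

theorem pvShortcut_bwd {p : PySem.Dict String String} {x r : String} (hxr : PvRoot p x r)
    {z s : String} (h : PvRoot (PySem.Dict.insert p x r) z s) : PvRoot p z s := by
  obtain ⟨n, h⟩ := h
  induction h with
  | zero s hs =>
    rw [PySem.Dict.get?_insert] at hs
    by_cases hsx : s = x
    · rw [if_pos hsx] at hs
      cases hs
      exact hsx ▸ hxr
    · rw [if_neg hsx] at hs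
      exact pvRoot_refl_of_root hs
  | @succ x' y' r' n' hxy hne htail ih =>
    have htl := ih
    rw [PySem.Dict.get?_insert] at hxy
    by_cases hzx : x' = x
    · rw [if_pos hzx] at hxy
      cases hxy
      have hroot : PvRoot p r r := pvRoot_refl_of_root (by
        obtain ⟨m, hm⟩ := hxr
        exact pvRootN_root hm)
      have : r' = r := pvRoot_det htl hroot
      subst this
      exact hzx ▸ hxr
    · rw [if_neg hzx] at hxy
      obtain ⟨m, hm⟩ := htl
      exact ⟨m + 1, PvRootN.succ hxy hne hm⟩

theorem pvShortcut_iff {p : PySem.Dict String String} {x r : String} (hxr : PvRoot p x r)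
    (z s : String) : PvRoot (PySem.Dict.insert p x r) z s ↔ PvRoot p z s :=
  ⟨pvShortcut_bwd hxr, pvShortcut_fwd hxr⟩

theorem pvShortcut_UF {p : PySem.Dict String String} {rk : PySem.Dict String Nat}
    (huf : PvUF p rk) {x r : String} (hxr : PvRoot p x r) :
    PvUF (PySem.Dict.insert p x r) rk := by
  intro z y hzy
  rw [PySem.Dict.get?_insert] at hzy
  by_cases hzx : z = x
  · rw [if_pos hzx] at hzy
    cases hzy
    subst hzx
    obtain ⟨n, hchain⟩ := hxr
    obtain ⟨w, hw⟩ := pvRootN_start hchain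
    obtain ⟨_, hrkz, _⟩ := huf _ _ hw
    have hcy : PySem.Dict.contains p r = true := by
      rw [PySem.Dict.contains_eq_isSome_get?, pvRootN_root hchain]; rfl
    refine ⟨?_, hrkz, ?_⟩
    · rw [PySem.Dict.contains_insert, hcy, Bool.or_true]
    · intro hne
      have hn1 : 1 ≤ n := by
        rcases n with _ | n
        · cases hchain with
          | zero _ _ => exact absurd rfl hne
        · omega
      have := pvChain_rank huf hchain
      omega
  · rw [if_neg hzx] at hzy
    obtain ⟨hcy, hrkz, hlt⟩ := huf _ _ hzy
    exact ⟨by rw [PySem.Dict.contains_insert, hcy, Bool.or_true], hrkz, hlt⟩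

theorem pvShortcut_contains {p : PySem.Dict String String} {x r : String} (hxr : PvRoot p x r)
    (z : String) : PySem.Dict.contains (PySem.Dict.insert p x r) z = PySem.Dict.contains p z := by
  rw [PySem.Dict.contains_insert]
  by_cases hzx : z = x
  · subst hzx
    obtain ⟨n, hchain⟩ := hxr
    obtain ⟨w, hw⟩ := pvRootN_start hchain
    have : PySem.Dict.contains p z = true := by
      rw [PySem.Dict.contains_eq_isSome_get?, hw]; rfl
    simp [this]
  · simp [beq_eq_false_iff_ne.mpr hzx]

theorem pvCompress_spec {rk : PySem.Dict String Nat} :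
    ∀ (fuel : Nat) (p : PySem.Dict String String) (x r : String),
    PvUF p rk → PvRoot p x r →
    PvUF (pvCompress r fuel p x) rk ∧
    (∀ z s, PvRoot (pvCompress r fuel p x) z s ↔ PvRoot p z s) ∧
    (∀ z, PySem.Dict.contains (pvCompress r fuel p x) z = PySem.Dict.contains p z) := by
  intro fuel
  induction fuel with
  | zero => intro p x r huf hroot; exact ⟨huf, fun _ _ => Iff.rfl, fun _ => rfl⟩
  | succ fuel ih =>
    intro p x r huf hroot
    obtain ⟨n, hchain⟩ := hroot
    obtain ⟨y, hy⟩ := pvRootN_start hchain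
    simp only [pvCompress, hy]
    by_cases hyr : y = r
    · rw [if_pos hyr]; exact ⟨huf, fun _ _ => Iff.rfl, fun _ => rfl⟩
    · rw [if_neg hyr]
      have hyx : y ≠ x := by
        intro hyx
        subst hyx
        have : r = y := pvRoot_det ⟨n, hchain⟩ (pvRoot_refl_of_root hy)
        exact hyr this.symm
      have htail : PvRoot p y r := by
        cases hchain with
        | zero _ hr => rw [hr] at hy; cases hy; exact absurd rfl hyx
        | succ hxy hne ht => rw [hxy] at hy; cases hy; exact ⟨_, ht⟩
      have hroot' : PvRoot p x r := ⟨n, hchain⟩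
      have huf' := pvShortcut_UF huf hroot'
      have htail' : PvRoot (PySem.Dict.insert p x r) y r := pvShortcut_fwd hroot' htail
      obtain ⟨h1, h2, h3⟩ := ih (PySem.Dict.insert p x r) y r huf' htail'
      refine ⟨h1, ?_, ?_⟩
      · intro z s; rw [h2 z s]; exact pvShortcut_iff hroot' z s
      · intro z; rw [h3 z]; exact pvShortcut_contains hroot' z

theorem pvFind_spec {p : PySem.Dict String String} {rk : PySem.Dict String Nat} {x : String}
    (huf : PvUF p rk) (hx : PySem.Dict.contains p x = true) :
    PvRoot p x (pvFind p rk x).1 ∧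
    PvUF (pvFind p rk x).2 rk ∧
    (∀ z s, PvRoot (pvFind p rk x).2 z s ↔ PvRoot p z s) ∧
    (∀ z, PySem.Dict.contains (pvFind p rk x).2 z = PySem.Dict.contains p z) := by
  obtain ⟨r, hroot⟩ := pvRoot_total huf hx
  obtain ⟨n, hchain⟩ := hroot
  have hfuel := pvRootN_lt_fuel huf hchain
  have hfr : pvFindRoot p (pvSumRk rk + 1) x = r := pvFindRoot_correct hchain _ hfuel
  have h1 : (pvFind p rk x).1 = r := by simp [pvFind, hfr]
  have h2 : (pvFind p rk x).2 = pvCompress r (pvSumRk rk + 1) p x := by simp [pvFind, hfr]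
  obtain ⟨hufc, hiff, hcont⟩ := pvCompress_spec (pvSumRk rk + 1) p x r huf ⟨n, hchain⟩
  rw [h1, h2]
  exact ⟨⟨n, hchain⟩, hufc, hiff, hcont⟩

theorem pvEqv_iff_of_roots_iff {q p : PySem.Dict String String}
    (h : ∀ z s, PvRoot q z s ↔ PvRoot p z s) (z y : String) :
    PvEqv q z y ↔ PvEqv p z y := by
  constructor
  · rintro ⟨r, h1, h2⟩; exact ⟨r, (h _ _).mp h1, (h _ _).mp h2⟩
  · rintro ⟨r, h1, h2⟩; exact ⟨r, (h _ _).mpr h1, (h _ _).mpr h2⟩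

theorem pvEqv_refl_of_contains {p : PySem.Dict String String} {rk : PySem.Dict String Nat}
    {t : String} (huf : PvUF p rk) (ht : PySem.Dict.contains p t = true) : PvEqv p t t := by
  obtain ⟨r, hr⟩ := pvRoot_total huf ht
  exact ⟨r, hr, hr⟩

-- linking root v under root u: every root equal to v becomes u, others unchanged
theorem pvLink_fwd {p : PySem.Dict String String} {u v : String}
    (hu : PySem.Dict.get? p u = some u) (hv : PySem.Dict.get? p v = some v) (hne : v ≠ u)
    {z s : String} (h : PvRoot (PySem.Dict.insert p v u) z s) :
    ∃ s₀, PvRoot p z s₀ ∧ s = (if s₀ = v then u else s₀) := by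
  obtain ⟨n, h⟩ := h
  induction h with
  | zero s hs =>
    rw [PySem.Dict.get?_insert] at hs
    by_cases hsv : s = v
    · rw [if_pos hsv] at hs
      injection hs with h'
      exact absurd (h'.trans hsv) (Ne.symm hne)
    · rw [if_neg hsv] at hs
      exact ⟨s, pvRoot_refl_of_root hs, by rw [if_neg hsv]⟩
  | @succ x' y' r' n' hxy hne' htail ih =>
    rw [PySem.Dict.get?_insert] at hxy
    by_cases hxv : x' = v
    · rw [if_pos hxv] at hxy
      injection hxy with hyu
      obtain ⟨s₀, hs₀, heq⟩ := ih
      have hy'u : PvRoot p y' y' := by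
        rw [← hyu]; exact pvRoot_refl_of_root hu
      have hs0 : s₀ = y' := pvRoot_det hs₀ hy'u
      have hr'u : r' = u := by
        rw [heq, hs0, ← hyu, if_neg (Ne.symm hne)]
      refine ⟨v, ?_, ?_⟩
      · rw [← hxv]; exact pvRoot_refl_of_root (hxv ▸ hv)
      · rw [if_pos rfl, hr'u]
    · rw [if_neg hxv] at hxy
      obtain ⟨s₀, ⟨m, hm⟩, heq⟩ := ih
      exact ⟨s₀, ⟨m + 1, PvRootN.succ hxy hne' hm⟩, heq⟩

theorem pvLink_bwd {p : PySem.Dict String String} {u v : String}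
    (hu : PySem.Dict.get? p u = some u) (hv : PySem.Dict.get? p v = some v) (hne : v ≠ u)
    {z s₀ : String} (h : PvRoot p z s₀) :
    PvRoot (PySem.Dict.insert p v u) z (if s₀ = v then u else s₀) := by
  obtain ⟨n, h⟩ := h
  induction h with
  | zero s hs =>
    by_cases hsv : s = v
    · rw [if_pos hsv]
      have hus : u ≠ s := by rw [hsv]; exact Ne.symm hne
      have h1 : PySem.Dict.get? (PySem.Dict.insert p v u) s = some u := by
        rw [PySem.Dict.get?_insert, if_pos hsv]
      have h2 : PySem.Dict.get? (PySem.Dict.insert p v u) u = some u := by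
        rw [PySem.Dict.get?_insert, if_neg (Ne.symm hne)]
        exact hu
      exact ⟨1, PvRootN.succ h1 hus (PvRootN.zero u h2)⟩
    · rw [if_neg hsv]
      exact pvRoot_refl_of_root (by rw [PySem.Dict.get?_insert, if_neg hsv]; exact hs)
  | @succ x' y' r' n' hxy hne' htail ih =>
    have hxv : x' ≠ v := by
      intro hxv
      rw [hxv, hv] at hxy
      injection hxy with h'
      exact hne' (h'.symm.trans hxv.symm)
    obtain ⟨m, hm⟩ := ih
    exact ⟨m + 1, PvRootN.succ (by rw [PySem.Dict.get?_insert, if_neg hxv]; exact hxy) hne' hm⟩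

theorem pvLink_UF {p : PySem.Dict String String} {rk : PySem.Dict String Nat} {u v : String}
    (huf : PvUF p rk) (hu : PySem.Dict.get? p u = some u) (hv : PySem.Dict.get? p v = some v)
    (hne : v ≠ u) (hle : PySem.Dict.getD rk v 0 ≤ PySem.Dict.getD rk u 0) :
    PvUF (PySem.Dict.insert p v u)
      (if PySem.Dict.getD rk u 0 = PySem.Dict.getD rk v 0 then
        PySem.Dict.insert rk u (PySem.Dict.getD rk u 0 + 1) else rk) := by
  have hrkv : PySem.Dict.contains rk v = true := (huf _ _ hv).2.1
  have hrku : PySem.Dict.contains rk u = true := (huf _ _ hu).2.1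
  intro z y hzy
  rw [PySem.Dict.get?_insert] at hzy
  have hcontmono : ∀ w, PySem.Dict.contains rk w = true →
      PySem.Dict.contains (if PySem.Dict.getD rk u 0 = PySem.Dict.getD rk v 0 then
        PySem.Dict.insert rk u (PySem.Dict.getD rk u 0 + 1) else rk) w = true := by
    intro w hw
    split
    · rw [PySem.Dict.contains_insert, hw, Bool.or_true]
    · exact hw
  by_cases hzv : z = v
  · rw [if_pos hzv] at hzy
    injection hzy with hyu
    refine ⟨?_, hcontmono _ (by rw [hzv]; exact hrkv), ?_⟩
    · have hcu : PySem.Dict.contains p u = true := by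
        rw [PySem.Dict.contains_eq_isSome_get?, hu]; rfl
      rw [PySem.Dict.contains_insert, ← hyu, hcu, Bool.or_true]
    · intro _
      rw [← hyu, hzv]
      split
      · next heq =>
        rw [PySem.Dict.getD_insert, PySem.Dict.getD_insert, if_neg hne, if_pos rfl]
        omega
      · next hne2 => omega
  · rw [if_neg hzv] at hzy
    obtain ⟨hcy, hrkz, hlt⟩ := huf _ _ hzy
    refine ⟨by rw [PySem.Dict.contains_insert, hcy, Bool.or_true], hcontmono _ hrkz, ?_⟩
    intro hne3
    have hlt := hlt hne3
    have hzu : z ≠ u := by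
      intro hzu
      rw [hzu, hu] at hzy
      injection hzy with h'
      exact hne3 (h'.symm.trans hzu.symm)
    split
    · next heq =>
      rw [PySem.Dict.getD_insert, PySem.Dict.getD_insert, if_neg hzu]
      split
      · next h4 => rw [h4] at hlt; omega
      · omega
    · exact hlt

-- the equivalence after an effective union: classes of a and b merged
theorem pvLinkEqv_aux {q p : PySem.Dict String String} {a b u v : String}
    (hqiff : ∀ z s, PvRoot q z s ↔ PvRoot p z s)
    (hA : PvRoot p a u) (hB : PvRoot p b v) (hne : v ≠ u)
    (hu : PySem.Dict.get? q u = some u) (hv : PySem.Dict.get? q v = some v) (z y : String) :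
    PvEqv (PySem.Dict.insert q v u) z y ↔
      (PvEqv p z y ∨ (PvEqv p z a ∧ PvEqv p b y) ∨ (PvEqv p z b ∧ PvEqv p a y)) := by
  constructor
  · rintro ⟨s, hz, hy⟩
    obtain ⟨s₀, hz₀, hseq⟩ := pvLink_fwd hu hv hne hz
    obtain ⟨t₀, hy₀, hteq⟩ := pvLink_fwd hu hv hne hy
    have hz₀ : PvRoot p z s₀ := (hqiff _ _).mp hz₀
    have hy₀ : PvRoot p y t₀ := (hqiff _ _).mp hy₀
    by_cases hsv : s₀ = v <;> by_cases htv : t₀ = v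
    · rw [hsv] at hz₀; rw [htv] at hy₀
      exact Or.inl ⟨v, hz₀, hy₀⟩
    · rw [if_pos hsv] at hseq
      rw [if_neg htv] at hteq
      have ht0u : t₀ = u := by rw [← hteq, hseq]
      rw [hsv] at hz₀; rw [ht0u] at hy₀
      exact Or.inr (Or.inr ⟨⟨v, hz₀, hB⟩, ⟨u, hA, hy₀⟩⟩)
    · rw [if_neg hsv] at hseq
      rw [if_pos htv] at hteq
      have hs0u : s₀ = u := by rw [← hseq, hteq]
      rw [hs0u] at hz₀; rw [htv] at hy₀
      exact Or.inr (Or.inl ⟨⟨u, hz₀, hA⟩, ⟨v, hB, hy₀⟩⟩)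
    · rw [if_neg hsv] at hseq
      rw [if_neg htv] at hteq
      rw [← hseq] at hz₀
      rw [← hteq] at hy₀
      exact Or.inl ⟨s, hz₀, hy₀⟩
  · intro h
    have build : ∀ {w s₀}, PvRoot p w s₀ →
        PvRoot (PySem.Dict.insert q v u) w (if s₀ = v then u else s₀) := by
      intro w s₀ hw
      exact pvLink_bwd hu hv hne ((hqiff _ _).mpr hw)
    rcases h with ⟨s₀, hz, hy⟩ | ⟨⟨s₁, hz, ha'⟩, ⟨s₂, hb', hy⟩⟩ | ⟨⟨s₁, hz, hb'⟩, ⟨s₂, ha', hy⟩⟩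
    · exact ⟨_, build hz, build hy⟩
    · have h1 : s₁ = u := pvRoot_det ha' hA
      have h2 : s₂ = v := pvRoot_det hb' hB
      rw [h1] at hz; rw [h2] at hy
      refine ⟨u, ?_, ?_⟩
      · have := build hz
        rw [if_neg (Ne.symm hne)] at this
        exact this
      · have := build hy
        rw [if_pos rfl] at this
        exact this
    · have h1 : s₁ = v := pvRoot_det hb' hB
      have h2 : s₂ = u := pvRoot_det ha' hA
      rw [h1] at hz; rw [h2] at hy
      refine ⟨u, ?_, ?_⟩
      · have := build hz
        rw [if_pos rfl] at this
        exact this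
      · have := build hy
        rw [if_neg (Ne.symm hne)] at this
        exact this

theorem pvOr_swap {P Q R : Prop} : (P ∨ Q ∨ R) ↔ (P ∨ R ∨ Q) := by tauto

theorem pvUnion_spec {p : PySem.Dict String String} {rk : PySem.Dict String Nat} {a b : String}
    (huf : PvUF p rk) (ha : PySem.Dict.contains p a = true) (hb : PySem.Dict.contains p b = true) :
    PvUF (pvUnion p rk a b).1 (pvUnion p rk a b).2 ∧
    (∀ z, PySem.Dict.contains (pvUnion p rk a b).1 z = PySem.Dict.contains p z) ∧
    (∀ z y, PvEqv (pvUnion p rk a b).1 z y ↔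
      (PvEqv p z y ∨ (PvEqv p z a ∧ PvEqv p b y) ∨ (PvEqv p z b ∧ PvEqv p a y))) := by
  obtain ⟨hraA, huf1, hiff1, hcont1⟩ := pvFind_spec huf ha
  have hb1 : PySem.Dict.contains (pvFind p rk a).2 b = true := by rw [hcont1]; exact hb
  obtain ⟨hrbB, huf2, hiff2, hcont2⟩ := pvFind_spec huf1 hb1
  have hrb : PvRoot p b (pvFind (pvFind p rk a).2 rk b).1 := (hiff1 _ _).mp hrbB
  have hiff12 : ∀ z s, PvRoot (pvFind (pvFind p rk a).2 rk b).2 z s ↔ PvRoot p z s :=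
    fun z s => (hiff2 z s).trans (hiff1 z s)
  have hcont12 : ∀ z, PySem.Dict.contains (pvFind (pvFind p rk a).2 rk b).2 z = PySem.Dict.contains p z :=
    fun z => (hcont2 z).trans (hcont1 z)
  have hEqv2 := pvEqv_iff_of_roots_iff hiff12
  have rootEntry : ∀ {w r}, PvRoot p w r →
      PySem.Dict.get? (pvFind (pvFind p rk a).2 rk b).2 r = some r := by
    intro w r hw
    obtain ⟨n, hch⟩ := hw
    obtain ⟨m, hch2⟩ := (hiff12 r r).mpr (pvRoot_refl_of_root (pvRootN_root hch))
    exact pvRootN_root hch2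
  by_cases heq : (pvFind p rk a).1 = (pvFind (pvFind p rk a).2 rk b).1
  · have hred : pvUnion p rk a b = ((pvFind (pvFind p rk a).2 rk b).2, rk) := by
      simp only [pvUnion]
      rw [if_pos heq]
    rw [hred]
    refine ⟨huf2, hcont12, ?_⟩
    intro z y
    rw [hEqv2]
    have hab : PvEqv p a b := ⟨(pvFind p rk a).1, hraA, by rw [heq]; exact hrb⟩
    constructor
    · exact Or.inl
    · rintro (h | ⟨h1, h2⟩ | ⟨h1, h2⟩)
      · exact h
      · exact pvEqv_trans (pvEqv_trans h1 hab) h2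
      · exact pvEqv_trans (pvEqv_trans h1 (pvEqv_symm hab)) h2
  · have hua := rootEntry hraA
    have hub := rootEntry hrb
    by_cases hcmp : PySem.Dict.getD rk (pvFind p rk a).1 0 < PySem.Dict.getD rk (pvFind (pvFind p rk a).2 rk b).1 0
    · -- b's root is the new root, a's root is linked under it
      have hred : pvUnion p rk a b =
          (PySem.Dict.insert (pvFind (pvFind p rk a).2 rk b).2 (pvFind p rk a).1 (pvFind (pvFind p rk a).2 rk b).1,
           if PySem.Dict.getD rk (pvFind (pvFind p rk a).2 rk b).1 0 = PySem.Dict.getD rk (pvFind p rk a).1 0 then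
             PySem.Dict.insert rk (pvFind (pvFind p rk a).2 rk b).1 (PySem.Dict.getD rk (pvFind (pvFind p rk a).2 rk b).1 0 + 1)
           else rk) := by
        simp only [pvUnion]
        rw [if_neg heq, if_pos hcmp, if_pos hcmp]
      rw [hred]
      refine ⟨?_, ?_, ?_⟩
      · exact pvLink_UF huf2 hub hua heq (Nat.le_of_lt hcmp)
      · intro z
        rw [PySem.Dict.contains_insert, hcont12]
        by_cases hz : z = (pvFind p rk a).1
        · have : PySem.Dict.contains p z = true := by
            rw [hz, PySem.Dict.contains_eq_isSome_get?]
            obtain ⟨n, hch⟩ := hraA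
            rw [pvRootN_root hch]; rfl
          rw [this, Bool.or_true]
        · rw [beq_eq_false_iff_ne.mpr hz, Bool.false_or]
      · intro z y
        rw [pvLinkEqv_aux hiff12 hrb hraA heq hub hua z y]
        exact pvOr_swap
    · have hle : PySem.Dict.getD rk (pvFind (pvFind p rk a).2 rk b).1 0 ≤ PySem.Dict.getD rk (pvFind p rk a).1 0 :=
        Nat.le_of_not_lt hcmp
      have hred : pvUnion p rk a b =
          (PySem.Dict.insert (pvFind (pvFind p rk a).2 rk b).2 (pvFind (pvFind p rk a).2 rk b).1 (pvFind p rk a).1,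
           if PySem.Dict.getD rk (pvFind p rk a).1 0 = PySem.Dict.getD rk (pvFind (pvFind p rk a).2 rk b).1 0 then
             PySem.Dict.insert rk (pvFind p rk a).1 (PySem.Dict.getD rk (pvFind p rk a).1 0 + 1)
           else rk) := by
        simp only [pvUnion]
        rw [if_neg heq, if_neg hcmp, if_neg hcmp]
      rw [hred]
      refine ⟨?_, ?_, ?_⟩
      · exact pvLink_UF huf2 hua hub (Ne.symm heq) hle
      · intro z
        rw [PySem.Dict.contains_insert, hcont12]
        by_cases hz : z = (pvFind (pvFind p rk a).2 rk b).1
        · have : PySem.Dict.contains p z = true := by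
            rw [hz, PySem.Dict.contains_eq_isSome_get?]
            obtain ⟨n, hch⟩ := hrb
            rw [pvRootN_root hch]; rfl
          rw [this, Bool.or_true]
        · rw [beq_eq_false_iff_ne.mpr hz, Bool.false_or]
      · intro z y
        exact pvLinkEqv_aux hiff12 hraA hrb (Ne.symm heq) hua hub z y

theorem pvUnionFold_redundant (t : String) :
    ∀ (l : List String) (q : PySem.Dict String String) (rkq : PySem.Dict String Nat),
    PvUF q rkq → PySem.Dict.contains q t = true →
    (∀ v ∈ l, PySem.Dict.contains q v = true ∧ PvEqv q t v) →
    PvUF (l.foldl (fun s v => pvUnion s.1 s.2 t v) (q, rkq)).1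
         (l.foldl (fun s v => pvUnion s.1 s.2 t v) (q, rkq)).2 ∧
    (∀ z, PySem.Dict.contains (l.foldl (fun s v => pvUnion s.1 s.2 t v) (q, rkq)).1 z = PySem.Dict.contains q z) ∧
    (∀ z y, PvEqv (l.foldl (fun s v => pvUnion s.1 s.2 t v) (q, rkq)).1 z y ↔ PvEqv q z y) := by
  intro l
  induction l with
  | nil =>
    intro q rkq huf ht _
    exact ⟨huf, fun _ => rfl, fun _ _ => Iff.rfl⟩
  | cons v l ih =>
    intro q rkq huf ht hl
    obtain ⟨hufw, hcontw, heqvw⟩ := pvUnion_spec huf ht (hl v (List.mem_cons_self)).1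
    have htv : PvEqv q t v := (hl v (List.mem_cons_self)).2
    have hcollapse : ∀ z y, PvEqv (pvUnion q rkq t v).1 z y ↔ PvEqv q z y := by
      intro z y
      rw [heqvw z y]
      constructor
      · rintro (h | ⟨h1, h2⟩ | ⟨h1, h2⟩)
        · exact h
        · exact pvEqv_trans (pvEqv_trans h1 htv) h2
        · exact pvEqv_trans (pvEqv_trans h1 (pvEqv_symm htv)) h2
      · exact Or.inl
    have step : (v :: l).foldl (fun s v => pvUnion s.1 s.2 t v) (q, rkq) =
        l.foldl (fun s v => pvUnion s.1 s.2 t v) (pvUnion q rkq t v) := by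
      simp [List.foldl_cons]
    rw [step]
    have hrec := ih (pvUnion q rkq t v).1 (pvUnion q rkq t v).2 hufw
      (by rw [hcontw]; exact ht)
      (by
        intro v' hv'
        refine ⟨by rw [hcontw]; exact (hl v' (List.mem_cons_of_mem _ hv')).1, ?_⟩
        rw [hcollapse]
        exact (hl v' (List.mem_cons_of_mem _ hv')).2)
    obtain ⟨h1, h2, h3⟩ := hrec
    refine ⟨h1, ?_, ?_⟩
    · intro z; rw [h2 z, hcontw]
    · intro z y; rw [h3 z y, hcollapse]

theorem pvUnionFold_head {p : PySem.Dict String String} {rk : PySem.Dict String Nat}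
    {t h : String} {l : List String}
    (huf : PvUF p rk) (ht : PySem.Dict.contains p t = true)
    (hl : ∀ v ∈ h :: l, PySem.Dict.contains p v = true ∧ PvEqv p v h) :
    PvUF ((h :: l).foldl (fun s v => pvUnion s.1 s.2 t v) (p, rk)).1
         ((h :: l).foldl (fun s v => pvUnion s.1 s.2 t v) (p, rk)).2 ∧
    (∀ z, PySem.Dict.contains ((h :: l).foldl (fun s v => pvUnion s.1 s.2 t v) (p, rk)).1 z = PySem.Dict.contains p z) ∧
    (∀ z y, PvEqv ((h :: l).foldl (fun s v => pvUnion s.1 s.2 t v) (p, rk)).1 z y ↔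
      (PvEqv p z y ∨ (PvEqv p z t ∧ PvEqv p h y) ∨ (PvEqv p z h ∧ PvEqv p t y))) := by
  obtain ⟨hufw, hcontw, heqvw⟩ := pvUnion_spec huf ht (hl h (List.mem_cons_self)).1
  have step : (h :: l).foldl (fun s v => pvUnion s.1 s.2 t v) (p, rk) =
      l.foldl (fun s v => pvUnion s.1 s.2 t v) (pvUnion p rk t h) := by
    simp [List.foldl_cons]
  rw [step]
  have hrec := pvUnionFold_redundant t l (pvUnion p rk t h).1 (pvUnion p rk t h).2 hufw
    (by rw [hcontw]; exact ht)
    (by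
      intro v hv
      refine ⟨by rw [hcontw]; exact (hl v (List.mem_cons_of_mem _ hv)).1, ?_⟩
      rw [heqvw]
      exact Or.inr (Or.inl ⟨pvEqv_refl_of_contains huf ht, pvEqv_symm (hl v (List.mem_cons_of_mem _ hv)).2⟩))
  obtain ⟨h1, h2, h3⟩ := hrec
  refine ⟨h1, ?_, ?_⟩
  · intro z; rw [h2 z, hcontw]
  · intro z y; rw [h3 z y, heqvw]

-- adding a fresh singleton t ↦ t
theorem pvFresh_iff {p : PySem.Dict String String} {rk : PySem.Dict String Nat} {t : String}
    (huf : PvUF p rk) (ht : PySem.Dict.contains p t = false) (z s : String) (hz : z ≠ t) :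
    PvRoot (PySem.Dict.insert p t t) z s ↔ PvRoot p z s := by
  constructor
  · rintro ⟨n, h⟩
    induction h with
    | zero s hs =>
      rw [PySem.Dict.get?_insert, if_neg hz] at hs
      exact pvRoot_refl_of_root hs
    | @succ x' y' r' n' hxy hne' htail ih =>
      rw [PySem.Dict.get?_insert, if_neg hz] at hxy
      have hyt : y' ≠ t := by
        intro hyt
        have := (huf _ _ hxy).1
        rw [hyt, ht] at this
        cases this
      obtain ⟨m, hm⟩ := ih hyt
      exact ⟨m + 1, PvRootN.succ hxy hne' hm⟩
  · rintro ⟨n, h⟩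
    induction h with
    | zero s hs =>
      have hst : s ≠ t := by
        intro hst
        have : PySem.Dict.contains p s = true := by
          rw [PySem.Dict.contains_eq_isSome_get?, hs]; rfl
        rw [hst, ht] at this; cases this
      exact pvRoot_refl_of_root (by rw [PySem.Dict.get?_insert, if_neg hst]; exact hs)
    | @succ x' y' r' n' hxy hne' htail ih =>
      have hyt : y' ≠ t := by
        intro hyt
        have := (huf _ _ hxy).1
        rw [hyt, ht] at this
        cases this
      obtain ⟨m, hm⟩ := ih hyt
      exact ⟨m + 1, PvRootN.succ (by rw [PySem.Dict.get?_insert, if_neg hz]; exact hxy) hne' hm⟩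

theorem pvRoot_mem_dom {p : PySem.Dict String String} {z s : String} (h : PvRoot p z s) :
    PySem.Dict.contains p s = true := by
  obtain ⟨n, hch⟩ := h
  rw [PySem.Dict.contains_eq_isSome_get?, pvRootN_root hch]; rfl

theorem pvFresh_UF {p : PySem.Dict String String} {rk : PySem.Dict String Nat} {t : String}
    (huf : PvUF p rk) (ht : PySem.Dict.contains p t = false) :
    PvUF (PySem.Dict.insert p t t) (PySem.Dict.insert rk t 0) := by
  intro z y hzy
  rw [PySem.Dict.get?_insert] at hzy
  by_cases hzt : z = t
  · rw [if_pos hzt] at hzy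
    injection hzy with hyt
    refine ⟨?_, ?_, ?_⟩
    · rw [PySem.Dict.contains_insert, show (y == t) = true from beq_iff_eq.mpr hyt.symm, Bool.true_or]
    · rw [PySem.Dict.contains_insert, show (z == t) = true from beq_iff_eq.mpr hzt, Bool.true_or]
    · intro hne
      exact absurd (hyt.symm.trans hzt.symm) hne
  · rw [if_neg hzt] at hzy
    obtain ⟨hcy, hrkz, hlt⟩ := huf _ _ hzy
    have hyt : y ≠ t := by
      intro hyt
      rw [hyt, ht] at hcy; cases hcy
    refine ⟨by rw [PySem.Dict.contains_insert, hcy, Bool.or_true], by rw [PySem.Dict.contains_insert, hrkz, Bool.or_true], ?_⟩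
    intro hne
    rw [PySem.Dict.getD_insert, PySem.Dict.getD_insert, if_neg hzt, if_neg hyt]
    exact hlt hne

theorem pvEqvFresh {p : PySem.Dict String String} {rk : PySem.Dict String Nat} {t : String}
    (huf : PvUF p rk) (hcf : PySem.Dict.contains p t = false) {x y : String}
    (hx : x ≠ t) (hy : y ≠ t) :
    PvEqv (PySem.Dict.insert p t t) x y ↔ PvEqv p x y := by
  constructor
  · rintro ⟨r, h1, h2⟩
    exact ⟨r, (pvFresh_iff huf hcf x r hx).mp h1, (pvFresh_iff huf hcf y r hy).mp h2⟩
  · rintro ⟨r, h1, h2⟩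
    exact ⟨r, (pvFresh_iff huf hcf x r hx).mpr h1, (pvFresh_iff huf hcf y r hy).mpr h2⟩

-- ===== the bucket graph (B's view of the data) =====

-- two teams are adjacent when some 4-species bucket holds both
def PvAdj (d : PySem.Dict (List String) (List String)) (x y : String) : Prop :=
  ∃ k, x ∈ PySem.Dict.getD d k [] ∧ y ∈ PySem.Dict.getD d k []

def PvConn (d : PySem.Dict (List String) (List String)) (x y : String) : Prop :=
  Relation.ReflTransGen (PvAdj d) x y

theorem pvAdj_symm {d : PySem.Dict (List String) (List String)} {x y : String}
    (h : PvAdj d x y) : PvAdj d y x := by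
  obtain ⟨k, hx, hy⟩ := h; exact ⟨k, hy, hx⟩

theorem pvConn_symm {d : PySem.Dict (List String) (List String)} {x y : String}
    (h : PvConn d x y) : PvConn d y x :=
  Relation.ReflTransGen.symmetric (fun _ _ => pvAdj_symm) h

theorem pvAdj_modify (d : PySem.Dict (List String) (List String)) (k : List String)
    (t x y : String) :
    PvAdj (PySem.Dict.modify d k [] (fun l2 => l2 ++ [t])) x y ↔
      PvAdj d x y ∨ ((x ∈ PySem.Dict.getD d k [] ∨ x = t) ∧ (y ∈ PySem.Dict.getD d k [] ∨ y = t)) := by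
  constructor
  · rintro ⟨k', hx, hy⟩
    by_cases hk : k' = k
    · subst hk
      rw [PySem.Dict.getD_modify, if_pos rfl, List.mem_append, List.mem_singleton] at hx hy
      exact Or.inr ⟨hx, hy⟩
    · rw [PySem.Dict.getD_modify, if_neg hk] at hx hy
      exact Or.inl ⟨k', hx, hy⟩
  · rintro (⟨k', hx, hy⟩ | ⟨hx, hy⟩)
    · by_cases hk : k' = k
      · subst hk
        exact ⟨k', by rw [PySem.Dict.getD_modify, if_pos rfl, List.mem_append]; exact Or.inl hx,
          by rw [PySem.Dict.getD_modify, if_pos rfl, List.mem_append]; exact Or.inl hy⟩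
      · exact ⟨k', by rw [PySem.Dict.getD_modify, if_neg hk]; exact hx,
          by rw [PySem.Dict.getD_modify, if_neg hk]; exact hy⟩
    · refine ⟨k, ?_, ?_⟩ <;>
        rw [PySem.Dict.getD_modify, if_pos rfl, List.mem_append, List.mem_singleton] <;>
        assumption

-- appending t to an empty bucket adds only the loop (t, t): connectivity is unchanged
theorem pvConn_modify_nil {d : PySem.Dict (List String) (List String)} {k : List String}
    {t : String} (hget : PySem.Dict.getD d k [] = []) (x y : String) :
    PvConn (PySem.Dict.modify d k [] (fun l2 => l2 ++ [t])) x y ↔ PvConn d x y := by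
  constructor
  · intro h
    induction h with
    | refl => exact Relation.ReflTransGen.refl
    | tail hstep hadj ih =>
      rcases (pvAdj_modify d k t _ _).mp hadj with h1 | ⟨hx, hy⟩
      · exact Relation.ReflTransGen.tail ih h1
      · rw [hget] at hx hy
        rcases hx with hx | hx
        · cases hx
        · rcases hy with hy | hy
          · cases hy
          · rw [hx] at ih; rw [hy]; exact ih
  · intro h
    exact Relation.ReflTransGen.mono
      (fun a b hab => (pvAdj_modify d k t a b).mpr (Or.inl hab)) h

-- appending t to a nonempty bucket merges t's component with the bucket's component
theorem pvConn_modify_cons {d : PySem.Dict (List String) (List String)} {k : List String}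
    {t h : String} {rest : List String}
    (hget : PySem.Dict.getD d k [] = h :: rest) (x y : String) :
    PvConn (PySem.Dict.modify d k [] (fun l2 => l2 ++ [t])) x y ↔
      (PvConn d x y ∨ (PvConn d x t ∧ PvConn d h y) ∨ (PvConn d x h ∧ PvConn d t y)) := by
  have hmono : ∀ a b, PvConn d a b → PvConn (PySem.Dict.modify d k [] (fun l2 => l2 ++ [t])) a b :=
    fun a b hab => Relation.ReflTransGen.mono
      (fun a b hab => (pvAdj_modify d k t a b).mpr (Or.inl hab)) hab
  have hth : PvAdj (PySem.Dict.modify d k [] (fun l2 => l2 ++ [t])) t h :=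
    (pvAdj_modify d k t t h).mpr (Or.inr ⟨Or.inr rfl, Or.inl (by rw [hget]; exact List.mem_cons_self)⟩)
  have hadjR : ∀ a b, PvAdj (PySem.Dict.modify d k [] (fun l2 => l2 ++ [t])) a b →
      (PvConn d a b ∨ (PvConn d a t ∧ PvConn d h b) ∨ (PvConn d a h ∧ PvConn d t b)) := by
    intro a b hab
    rcases (pvAdj_modify d k t a b).mp hab with h1 | ⟨ha, hb⟩
    · exact Or.inl (Relation.ReflTransGen.single h1)
    · have hmemh : h ∈ PySem.Dict.getD d k [] := by rw [hget]; exact List.mem_cons_self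
      rcases ha with ha | ha <;> rcases hb with hb | hb
      · exact Or.inl (Relation.ReflTransGen.single ⟨k, ha, hb⟩)
      · exact Or.inr (Or.inr ⟨Relation.ReflTransGen.single ⟨k, ha, hmemh⟩, hb ▸ Relation.ReflTransGen.refl⟩)
      · exact Or.inr (Or.inl ⟨ha ▸ Relation.ReflTransGen.refl, Relation.ReflTransGen.single ⟨k, hmemh, hb⟩⟩)
      · subst ha; subst hb; exact Or.inl Relation.ReflTransGen.refl
  constructor
  · intro hconn
    induction hconn with
    | refl => exact Or.inl Relation.ReflTransGen.refl
    | tail hstep hadj ih =>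
      rcases hadjR _ _ hadj with h1 | ⟨h1, h2⟩ | ⟨h1, h2⟩
      · rcases ih with i1 | ⟨i1, i2⟩ | ⟨i1, i2⟩
        · exact Or.inl (i1.trans h1)
        · exact Or.inr (Or.inl ⟨i1, i2.trans h1⟩)
        · exact Or.inr (Or.inr ⟨i1, i2.trans h1⟩)
      · rcases ih with i1 | ⟨i1, i2⟩ | ⟨i1, i2⟩
        · exact Or.inr (Or.inl ⟨i1.trans h1, h2⟩)
        · exact Or.inr (Or.inl ⟨i1, h2⟩)
        · exact Or.inl (i1.trans h2)
      · rcases ih with i1 | ⟨i1, i2⟩ | ⟨i1, i2⟩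
        · exact Or.inr (Or.inr ⟨i1.trans h1, h2⟩)
        · exact Or.inl (i1.trans h2)
        · exact Or.inr (Or.inr ⟨i1, h2⟩)
  · rintro (h1 | ⟨h1, h2⟩ | ⟨h1, h2⟩)
    · exact hmono _ _ h1
    · exact ((hmono _ _ h1).tail hth).trans (hmono _ _ h2)
    · exact ((hmono _ _ h1).tail (pvAdj_symm hth)).trans (hmono _ _ h2)

-- ===== the simulation invariant of the main loop: A's union-find equivalence is
-- ===== exactly connectivity in the bucket graph built so far =====

structure PvSim2 (p : PySem.Dict String String) (rk : PySem.Dict String Nat)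
    (index : PySem.Dict (List String) (List String)) (ts : List String) : Prop where
  uf : PvUF p rk
  domp : ∀ z, PySem.Dict.contains p z = true ↔ z ∈ ts
  bdom : ∀ k v, v ∈ PySem.Dict.getD index k [] → v ∈ ts
  kernel : ∀ x ∈ ts, ∀ y ∈ ts, (PvEqv p x y ↔ PvConn index x y)

theorem pvSim2_init : PvSim2 PySem.Dict.empty PySem.Dict.empty PySem.Dict.empty [] := by
  refine ⟨?_, ?_, ?_, ?_⟩
  · intro x y h
    rw [PySem.Dict.get?_empty] at h
    cases h
  · intro z
    rw [PySem.Dict.contains_empty]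
    simp
  · intro k v hv
    rw [PySem.Dict.getD_empty] at hv
    cases hv
  · intro x hx
    cases hx

-- t in no bucket: t is connected only to itself
theorem pvConn_isolated {d : PySem.Dict (List String) (List String)} {t y : String}
    (ht : ∀ k, t ∉ PySem.Dict.getD d k []) (h : PvConn d t y) : y = t := by
  rcases Relation.ReflTransGen.cases_head h with h1 | ⟨c, hadj, _⟩
  · exact h1.symm
  · obtain ⟨k, htk, _⟩ := hadj
    exact absurd htk (ht k)

-- registering a brand-new team t: isolated on both sides
theorem pvAdd_sim2 {p : PySem.Dict String String} {rk : PySem.Dict String Nat}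
    {index : PySem.Dict (List String) (List String)} {ts : List String} {t : String}
    (hs : PvSim2 p rk index ts) (htn : t ∉ ts) :
    PvSim2 (PySem.Dict.insert p t t) (PySem.Dict.insert rk t 0) index (ts ++ [t]) := by
  have hcf : PySem.Dict.contains p t = false := by
    cases hb : PySem.Dict.contains p t
    · rfl
    · exact absurd ((hs.domp t).mp hb) htn
  have hmem_t : ∀ z, z ∈ ts ++ [t] ↔ z ∈ ts ∨ z = t := by
    intro z; rw [List.mem_append, List.mem_singleton]
  have hiso : ∀ k, t ∉ PySem.Dict.getD index k [] := by
    intro k hk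
    exact htn (hs.bdom k t hk)
  have hroott : PvRoot (PySem.Dict.insert p t t) t t :=
    pvRoot_refl_of_root (by rw [PySem.Dict.get?_insert, if_pos rfl])
  have hEqvT : ∀ y ∈ ts, ¬ PvEqv (PySem.Dict.insert p t t) t y := by
    rintro y hy ⟨r, h1, h2⟩
    have hrt : r = t := pvRoot_det h1 hroott
    have hyt : y ≠ t := fun e => htn (e ▸ hy)
    have := (pvFresh_iff hs.uf hcf y r hyt).mp h2
    rw [hrt] at this
    have := pvRoot_mem_dom this
    rw [hcf] at this
    cases this
  refine ⟨pvFresh_UF hs.uf hcf, ?_, ?_, ?_⟩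
  · intro z
    rw [PySem.Dict.contains_insert, hmem_t z]
    by_cases hzt : z = t
    · simp [hzt]
    · rw [show (z == t) = false from beq_eq_false_iff_ne.mpr hzt, Bool.false_or]
      rw [hs.domp z]
      constructor
      · exact Or.inl
      · rintro (h | h)
        · exact h
        · exact absurd h hzt
  · intro k v hv
    exact (hmem_t v).mpr (Or.inl (hs.bdom k v hv))
  · intro x hx y hy
    rcases (hmem_t x).mp hx with hx' | hx' <;> rcases (hmem_t y).mp hy with hy' | hy'
    · rw [pvEqvFresh hs.uf hcf (fun e => htn (e ▸ hx')) (fun e => htn (e ▸ hy'))]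
      exact hs.kernel x hx' y hy'
    · subst hy'
      constructor
      · intro he
        exact absurd (pvEqv_symm he) (hEqvT x hx')
      · intro hc
        have := pvConn_isolated hiso (pvConn_symm hc)
        exact absurd (this ▸ hx' : y ∈ ts) (this ▸ htn)
    · subst hx'
      constructor
      · intro he
        exact absurd he (hEqvT y hy')
      · intro hc
        have := pvConn_isolated hiso hc
        exact absurd (this ▸ hy' : x ∈ ts) (this ▸ htn)
    · rw [hx', hy']
      constructor
      · intro _; exact Relation.ReflTransGen.refl
      · intro _; exact ⟨t, hroott, hroott⟩

-- one 4-species key processed: A unions t with every stored team, the bucket gains t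
theorem pvStep_key2 {p : PySem.Dict String String} {rk : PySem.Dict String Nat}
    {index : PySem.Dict (List String) (List String)} {ts : List String} {t : String}
    (hs : PvSim2 p rk index ts) (ht : t ∈ ts) (k : List String) :
    PvSim2 ((PySem.Dict.getD index k []).foldl (fun q other => pvUnion q.1 q.2 t other) (p, rk)).1
           ((PySem.Dict.getD index k []).foldl (fun q other => pvUnion q.1 q.2 t other) (p, rk)).2
           (PySem.Dict.modify index k [] (fun l => l ++ [t])) ts := by
  have hbdom' : ∀ k' v, v ∈ PySem.Dict.getD (PySem.Dict.modify index k [] (fun l => l ++ [t])) k' [] → v ∈ ts := by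
    intro k' v hv
    rw [PySem.Dict.getD_modify] at hv
    by_cases hk : k' = k
    · rw [if_pos hk, List.mem_append, List.mem_singleton] at hv
      rcases hv with hv | hv
      · exact hs.bdom k v hv
      · exact hv ▸ ht
    · rw [if_neg hk] at hv
      exact hs.bdom k' v hv
  rcases hcur : PySem.Dict.getD index k [] with _ | ⟨h, restc⟩
  · rw [List.foldl_nil]
    refine ⟨hs.uf, hs.domp, hbdom', ?_⟩
    intro x hx y hy
    rw [pvConn_modify_nil hcur]
    exact hs.kernel x hx y hy
  · have hh_ts : h ∈ ts := hs.bdom k h (by rw [hcur]; exact List.mem_cons_self)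
    have hlist : ∀ v ∈ h :: restc, PySem.Dict.contains p v = true ∧ PvEqv p v h := by
      intro v hv
      have hv_ts : v ∈ ts := hs.bdom k v (by rw [hcur]; exact hv)
      refine ⟨(hs.domp v).mpr hv_ts, ?_⟩
      rw [hs.kernel v hv_ts h hh_ts]
      exact Relation.ReflTransGen.single ⟨k, by rw [hcur]; exact hv, by rw [hcur]; exact List.mem_cons_self⟩
    obtain ⟨hufU, hcontU, heqvU⟩ := pvUnionFold_head hs.uf ((hs.domp t).mpr ht) hlist
    refine ⟨hufU, ?_, hbdom', ?_⟩
    · intro z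
      rw [hcontU z]
      exact hs.domp z
    · intro x hx y hy
      rw [heqvU x y, pvConn_modify_cons hcur x y,
        hs.kernel x hx y hy, hs.kernel x hx t ht, hs.kernel h hh_ts y hy,
        hs.kernel x hx h hh_ts, hs.kernel t ht y hy]

-- all 15 keys of one team processed in sequence
theorem pvStep_keys2 {ts : List String} {t : String} :
    ∀ (combs : List (List String)) (p : PySem.Dict String String) (rk : PySem.Dict String Nat)
      (index : PySem.Dict (List String) (List String)),
    PvSim2 p rk index ts → t ∈ ts →
    PvSim2 ((combs.foldl (fun st2 key =>
        (((PySem.Dict.getD st2.2.2 key []).foldl (fun q other => pvUnion q.1 q.2 t other) (st2.1, st2.2.1)).1,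
         ((PySem.Dict.getD st2.2.2 key []).foldl (fun q other => pvUnion q.1 q.2 t other) (st2.1, st2.2.1)).2,
         PySem.Dict.modify st2.2.2 key [] (fun l => l ++ [t]))) (p, rk, index)).1)
      ((combs.foldl (fun st2 key =>
        (((PySem.Dict.getD st2.2.2 key []).foldl (fun q other => pvUnion q.1 q.2 t other) (st2.1, st2.2.1)).1,
         ((PySem.Dict.getD st2.2.2 key []).foldl (fun q other => pvUnion q.1 q.2 t other) (st2.1, st2.2.1)).2,
         PySem.Dict.modify st2.2.2 key [] (fun l => l ++ [t]))) (p, rk, index)).2.1)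
      ((combs.foldl (fun st2 key =>
        (((PySem.Dict.getD st2.2.2 key []).foldl (fun q other => pvUnion q.1 q.2 t other) (st2.1, st2.2.1)).1,
         ((PySem.Dict.getD st2.2.2 key []).foldl (fun q other => pvUnion q.1 q.2 t other) (st2.1, st2.2.1)).2,
         PySem.Dict.modify st2.2.2 key [] (fun l => l ++ [t]))) (p, rk, index)).2.2)
      ts := by
  intro combs
  induction combs with
  | nil =>
    intro p rk index hs _
    exact hs
  | cons k rest ih =>
    intro p rk index hs ht
    have hstep := pvStep_key2 hs ht k
    rw [List.foldl_cons]
    exact ih _ _ _ hstep ht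

-- the whole main loop, team by team
theorem pvMain2 :
    ∀ (rest : List (String × List String)) (p : PySem.Dict String String)
      (rk : PySem.Dict String Nat) (index : PySem.Dict (List String) (List String))
      (ts : List String),
    PvSim2 p rk index ts →
    (∀ q ∈ rest, q.1 ∉ ts) → (rest.map (fun q => q.1)).Nodup →
    PvSim2
      ((rest.foldl (fun st pr =>
        ((pvComb 4 (PySem.List.sorted pr.2 (fun s => s) false)).foldl
          (fun st2 key =>
            (((PySem.Dict.getD st2.2.2 key []).foldl (fun q other => pvUnion q.1 q.2 pr.1 other) (st2.1, st2.2.1)).1,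
             ((PySem.Dict.getD st2.2.2 key []).foldl (fun q other => pvUnion q.1 q.2 pr.1 other) (st2.1, st2.2.1)).2,
             PySem.Dict.modify st2.2.2 key [] (fun l => l ++ [pr.1])))
          ((pvAdd st.1 st.2.1 pr.1).1, (pvAdd st.1 st.2.1 pr.1).2, st.2.2))) (p, rk, index)).1)
      ((rest.foldl (fun st pr =>
        ((pvComb 4 (PySem.List.sorted pr.2 (fun s => s) false)).foldl
          (fun st2 key =>
            (((PySem.Dict.getD st2.2.2 key []).foldl (fun q other => pvUnion q.1 q.2 pr.1 other) (st2.1, st2.2.1)).1,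
             ((PySem.Dict.getD st2.2.2 key []).foldl (fun q other => pvUnion q.1 q.2 pr.1 other) (st2.1, st2.2.1)).2,
             PySem.Dict.modify st2.2.2 key [] (fun l => l ++ [pr.1])))
          ((pvAdd st.1 st.2.1 pr.1).1, (pvAdd st.1 st.2.1 pr.1).2, st.2.2))) (p, rk, index)).2.1)
      ((rest.foldl (fun st pr =>
        ((pvComb 4 (PySem.List.sorted pr.2 (fun s => s) false)).foldl
          (fun st2 key =>
            (((PySem.Dict.getD st2.2.2 key []).foldl (fun q other => pvUnion q.1 q.2 pr.1 other) (st2.1, st2.2.1)).1,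
             ((PySem.Dict.getD st2.2.2 key []).foldl (fun q other => pvUnion q.1 q.2 pr.1 other) (st2.1, st2.2.1)).2,
             PySem.Dict.modify st2.2.2 key [] (fun l => l ++ [pr.1])))
          ((pvAdd st.1 st.2.1 pr.1).1, (pvAdd st.1 st.2.1 pr.1).2, st.2.2))) (p, rk, index)).2.2)
      (ts ++ rest.map (fun q => q.1)) := by
  intro rest
  induction rest with
  | nil =>
    intro p rk index ts hs _ _
    simpa using hs
  | cons pr rest ih =>
    intro p rk index ts hs hnin hnd
    have htn : pr.1 ∉ ts := hnin pr List.mem_cons_self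
    have hcf : PySem.Dict.contains p pr.1 = false := by
      cases hb : PySem.Dict.contains p pr.1
      · rfl
      · exact absurd ((hs.domp pr.1).mp hb) htn
    have haddA : pvAdd p rk pr.1 = (PySem.Dict.insert p pr.1 pr.1, PySem.Dict.insert rk pr.1 0) := by
      simp [pvAdd, hcf]
    have hsim1 := pvAdd_sim2 hs htn
    have hsim2 := pvStep_keys2 (ts := ts ++ [pr.1]) (t := pr.1)
      (pvComb 4 (PySem.List.sorted pr.2 (fun s => s) false)) _ _ _ hsim1
      (by rw [List.mem_append, List.mem_singleton]; exact Or.inr rfl)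
    rw [List.foldl_cons]
    simp only [haddA]
    have hres := ih _ _ _ (ts ++ [pr.1]) hsim2
      (by
        intro q hq
        rw [List.mem_append, List.mem_singleton]
        rintro (h | h)
        · exact hnin q (List.mem_cons_of_mem _ hq) h
        · rw [List.map_cons, List.nodup_cons] at hnd
          exact hnd.1 (h ▸ List.mem_map_of_mem hq))
      (by rw [List.map_cons, List.nodup_cons] at hnd; exact hnd.2)
    have hts : ts ++ List.map (fun q => q.1) (pr :: rest) =
        (ts ++ [pr.1]) ++ List.map (fun q => q.1) rest := by simp
    rw [hts]
    exact hres

-- ===== pass 1 of B: the key table and the buckets =====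

def pvKeys (sp : List String) : List (List String) :=
  pvComb 4 (PySem.List.sorted sp (fun s => s) false)

def pvBucketF (l : List (String × List String)) : PySem.Dict (List String) (List String) :=
  l.foldl (fun b pr => (pvKeys pr.2).foldl
    (fun b2 k => PySem.Dict.modify b2 k [] (fun l2 => l2 ++ [pr.1])) b) PySem.Dict.empty

def pvKeysOfF (l : List (String × List String)) : PySem.Dict String (List (List String)) :=
  l.foldl (fun ko pr => PySem.Dict.insert ko pr.1 (pvKeys pr.2)) PySem.Dict.empty

-- A's main fold builds exactly the buckets in its third component
theorem pvProjA_inner (t : String) :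
    ∀ (combs : List (List String))
      (st2 : PySem.Dict String String × PySem.Dict String Nat × PySem.Dict (List String) (List String)),
    ((combs.foldl (fun st2 key =>
        (((PySem.Dict.getD st2.2.2 key []).foldl (fun q other => pvUnion q.1 q.2 t other) (st2.1, st2.2.1)).1,
         ((PySem.Dict.getD st2.2.2 key []).foldl (fun q other => pvUnion q.1 q.2 t other) (st2.1, st2.2.1)).2,
         PySem.Dict.modify st2.2.2 key [] (fun l => l ++ [t]))) st2).2.2) =
    combs.foldl (fun b k => PySem.Dict.modify b k [] (fun l => l ++ [t])) st2.2.2 := by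
  intro combs
  induction combs with
  | nil => intro st2; rfl
  | cons k rest ih =>
    intro st2
    rw [List.foldl_cons, List.foldl_cons]
    exact ih _

theorem pvProjA :
    ∀ (rest : List (String × List String))
      (st : PySem.Dict String String × PySem.Dict String Nat × PySem.Dict (List String) (List String)),
    ((rest.foldl (fun st pr =>
        ((pvComb 4 (PySem.List.sorted pr.2 (fun s => s) false)).foldl
          (fun st2 key =>
            (((PySem.Dict.getD st2.2.2 key []).foldl (fun q other => pvUnion q.1 q.2 pr.1 other) (st2.1, st2.2.1)).1,
             ((PySem.Dict.getD st2.2.2 key []).foldl (fun q other => pvUnion q.1 q.2 pr.1 other) (st2.1, st2.2.1)).2,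
             PySem.Dict.modify st2.2.2 key [] (fun l => l ++ [pr.1])))
          ((pvAdd st.1 st.2.1 pr.1).1, (pvAdd st.1 st.2.1 pr.1).2, st.2.2))) st).2.2) =
    rest.foldl (fun b pr => (pvKeys pr.2).foldl
      (fun b2 k => PySem.Dict.modify b2 k [] (fun l2 => l2 ++ [pr.1])) b) st.2.2 := by
  intro rest
  induction rest with
  | nil => intro st; rfl
  | cons pr rest ih =>
    intro st
    rw [List.foldl_cons, List.foldl_cons]
    rw [ih _]
    rw [pvProjA_inner]
    rfl

-- B's pass-1 fold: projections onto the key table and the buckets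
theorem pvProjB1 :
    ∀ (l : List (String × List String))
      (st : PySem.Dict String (List (List String)) × PySem.Dict (List String) (List String)),
    ((l.foldl (fun st pr =>
        ((PySem.Dict.insert st.1 pr.1 (pvComb 4 (PySem.List.sorted pr.2 (fun s => s) false))),
         (pvComb 4 (PySem.List.sorted pr.2 (fun s => s) false)).foldl
           (fun b k => PySem.Dict.modify b k [] (fun l2 => l2 ++ [pr.1])) st.2)) st).1) =
    l.foldl (fun ko pr => PySem.Dict.insert ko pr.1 (pvKeys pr.2)) st.1 := by
  intro l
  induction l with
  | nil => intro st; rfl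
  | cons pr l ih =>
    intro st
    rw [List.foldl_cons, List.foldl_cons]
    exact ih _

theorem pvProjB2 :
    ∀ (l : List (String × List String))
      (st : PySem.Dict String (List (List String)) × PySem.Dict (List String) (List String)),
    ((l.foldl (fun st pr =>
        ((PySem.Dict.insert st.1 pr.1 (pvComb 4 (PySem.List.sorted pr.2 (fun s => s) false))),
         (pvComb 4 (PySem.List.sorted pr.2 (fun s => s) false)).foldl
           (fun b k => PySem.Dict.modify b k [] (fun l2 => l2 ++ [pr.1])) st.2)) st).2) =
    l.foldl (fun b pr => (pvKeys pr.2).foldl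
      (fun b2 k => PySem.Dict.modify b2 k [] (fun l2 => l2 ++ [pr.1])) b) st.2 := by
  intro l
  induction l with
  | nil => intro st; rfl
  | cons pr l ih =>
    intro st
    rw [List.foldl_cons, List.foldl_cons]
    exact ih _

-- the key table: inserts at later distinct keys do not disturb a lookup
theorem pvKeysOf_stable :
    ∀ (l : List (String × List String)) (d : PySem.Dict String (List (List String))) (t : String),
    t ∉ l.map (fun q => q.1) →
    PySem.Dict.get? (l.foldl (fun ko pr => PySem.Dict.insert ko pr.1 (pvKeys pr.2)) d) t =
      PySem.Dict.get? d t := by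
  intro l
  induction l with
  | nil => intro d t _; rfl
  | cons pr l ih =>
    intro d t ht
    rw [List.map_cons, List.mem_cons] at ht
    push Not at ht
    rw [List.foldl_cons, ih _ t ht.2, PySem.Dict.get?_insert, if_neg ht.1]

theorem pvKeysOfF_get :
    ∀ (l : List (String × List String)) (d : PySem.Dict String (List (List String))),
    (l.map (fun q => q.1)).Nodup →
    ∀ t sp, (t, sp) ∈ l →
    PySem.Dict.get? (l.foldl (fun ko pr => PySem.Dict.insert ko pr.1 (pvKeys pr.2)) d) t =
      some (pvKeys sp) := by
  intro l
  induction l with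
  | nil => intro d _ t sp h; cases h
  | cons pr l ih =>
    intro d hnd t sp hmem
    rw [List.map_cons, List.nodup_cons] at hnd
    rw [List.foldl_cons]
    rcases List.mem_cons.mp hmem with heq | hmem'
    · have ht1 : t = pr.1 := by rw [← heq]
      have hsp : sp = pr.2 := by rw [← heq]
      rw [pvKeysOf_stable l _ t (by rw [ht1]; exact hnd.1), ht1,
        PySem.Dict.get?_insert, if_pos rfl, hsp]
    · exact ih _ hnd.2 t sp hmem'

-- the buckets: bucket[k] holds exactly the teams whose key list contains k
theorem pvBucket_getD (c : List String) :
    ∀ (l : List (String × List String)) (d : PySem.Dict (List String) (List String)),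
    PySem.Dict.getD (l.foldl (fun b pr => (pvKeys pr.2).foldl
      (fun b2 k => PySem.Dict.modify b2 k [] (fun l2 => l2 ++ [pr.1])) b) d) c [] =
    PySem.Dict.getD d c [] ++
      ((l.flatMap (fun pr => (pvKeys pr.2).map (fun k => (k, pr.1)))).filter
        (fun q => q.1 == c)).map (fun q => q.2) := by
  intro l
  induction l with
  | nil => intro d; simp
  | cons pr l ih =>
    intro d
    rw [List.foldl_cons, ih, List.flatMap_cons, List.filter_append, List.map_append,
      ← List.append_assoc]
    congr 1
    have hstep : (pvKeys pr.2).foldl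
        (fun b2 k => PySem.Dict.modify b2 k [] (fun l2 => l2 ++ [pr.1])) d =
        ((pvKeys pr.2).map (fun k => (k, pr.1))).foldl
          (fun d2 q => PySem.Dict.modify d2 q.1 [] (fun l2 => l2 ++ [q.2])) d := by
      rw [List.foldl_map]
    rw [hstep, PySem.Dict.getD_foldl_modify_append, List.filter_map, List.map_map]

theorem pvBucketF_mem (l : List (String × List String)) (c : List String) (x : String) :
    x ∈ PySem.Dict.getD (pvBucketF l) c [] ↔ ∃ sp, (x, sp) ∈ l ∧ c ∈ pvKeys sp := by
  unfold pvBucketF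
  rw [pvBucket_getD]
  simp only [PySem.Dict.getD_empty, List.nil_append, List.mem_map, List.mem_filter,
    List.mem_flatMap, List.mem_map]
  constructor
  · rintro ⟨⟨k, v⟩, ⟨⟨pr, hpr, ⟨k', hk', hq⟩⟩, hc⟩, hv⟩
    cases hq
    simp only [beq_iff_eq] at hc
    exact ⟨pr.2, by simpa [← hv, hc] using hpr, by rw [← hc]; exact hk'⟩
  · rintro ⟨sp, hmem, hc⟩
    exact ⟨(c, x), ⟨⟨(x, sp), hmem, ⟨c, hc, rfl⟩⟩, by simp⟩, rfl⟩

-- unique species list per team id under Pre_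
theorem pvUniqSp :
    ∀ (l : List (String × List String)), (l.map (fun q => q.1)).Nodup →
    ∀ t sp sp', (t, sp) ∈ l → (t, sp') ∈ l → sp = sp' := by
  intro l
  induction l with
  | nil => intro _ t sp sp' h; cases h
  | cons pr l ih =>
    intro hnd t sp sp' h1 h2
    rw [List.map_cons, List.nodup_cons] at hnd
    rcases List.mem_cons.mp h1 with e1 | m1 <;> rcases List.mem_cons.mp h2 with e2 | m2
    · rw [← e2] at e1; exact congrArg Prod.snd e1
    · exact absurd (congrArg Prod.fst e1 ▸ (List.mem_map_of_mem m2 : t ∈ l.map (fun q => q.1))) hnd.1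
    · exact absurd (congrArg Prod.fst e2 ▸ (List.mem_map_of_mem m1 : t ∈ l.map (fun q => q.1))) hnd.1
    · exact ih hnd.2 t sp sp' m1 m2

-- ===== the depth-first search of B =====

-- one candidate processed (the body of the innermost loop of pvScan)
def pvMark (lab : String) (st3 : List String × PySem.Dict String String) (v : String) :
    List String × PySem.Dict String String :=
  if PySem.Dict.contains st3.2 v then st3 else (v :: st3.1, PySem.Dict.insert st3.2 v lab)

theorem pvScan_eq (keysOf : PySem.Dict String (List (List String)))
    (bucket : PySem.Dict (List String) (List String)) (lab t : String)
    (st : List String × PySem.Dict String String) :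
    pvScan keysOf bucket lab t st =
      ((PySem.Dict.getD keysOf t []).flatMap (fun k => PySem.Dict.getD bucket k [])).foldl
        (pvMark lab) st := by
  unfold pvScan
  rw [List.foldl_flatMap]
  rfl

-- teams not yet labelled, among a fixed universe
def pvCnt (ts : List String) (comp : PySem.Dict String String) : Nat :=
  (ts.filter (fun v => !(PySem.Dict.contains comp v))).length

theorem pvCnt_le (ts : List String) (comp : PySem.Dict String String) :
    pvCnt ts comp ≤ ts.length :=
  List.length_filter_le _ _

theorem pvCnt_insert {ts : List String} {comp : PySem.Dict String String} {v lab : String}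
    (hv : v ∈ ts) (hnd : ts.Nodup) (hnc : PySem.Dict.contains comp v = false) :
    pvCnt ts (PySem.Dict.insert comp v lab) + 1 = pvCnt ts comp := by
  induction ts with
  | nil => cases hv
  | cons a ts ih =>
    rw [List.nodup_cons] at hnd
    unfold pvCnt
    by_cases hav : a = v
    · subst hav
      rw [List.filter_cons, List.filter_cons]
      have h1 : (!(PySem.Dict.contains (PySem.Dict.insert comp a lab) a)) = false := by
        rw [PySem.Dict.contains_insert]; simp
      have h2 : (!(PySem.Dict.contains comp a)) = true := by rw [hnc]; rfl
      rw [h1, h2]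
      have hcong : ts.filter (fun x => !(PySem.Dict.contains (PySem.Dict.insert comp a lab) x)) =
          ts.filter (fun x => !(PySem.Dict.contains comp x)) := by
        apply List.filter_congr
        intro x hx
        have hxa : (x == a) = false := beq_eq_false_iff_ne.mpr (fun e => hnd.1 (e ▸ hx))
        rw [PySem.Dict.contains_insert, hxa, Bool.false_or]
      rw [hcong]
      simp
    · have hvts : v ∈ ts := by
        rcases List.mem_cons.mp hv with h | h
        · exact absurd h.symm hav
        · exact h
      rw [List.filter_cons, List.filter_cons]
      have hae : PySem.Dict.contains (PySem.Dict.insert comp v lab) a = PySem.Dict.contains comp a := by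
        rw [PySem.Dict.contains_insert, beq_eq_false_iff_ne.mpr hav, Bool.false_or]
      rw [hae]
      have := ih hvts hnd.2
      unfold pvCnt at this
      cases hca : (!(PySem.Dict.contains comp a)) <;> simp only [if_true, if_false, Bool.false_eq_true, List.length_cons] <;> omega

-- marking never removes an entry
theorem pvMarkFold_mono (lab : String) :
    ∀ (vs : List String) (st : List String × PySem.Dict String String) (x : String) (w : String),
    PySem.Dict.get? st.2 x = some w → PySem.Dict.get? (vs.foldl (pvMark lab) st).2 x = some w := by
  intro vs
  induction vs with
  | nil => intro st x w h; exact h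
  | cons v vs ih =>
    intro st x w h
    rw [List.foldl_cons]
    apply ih
    unfold pvMark
    by_cases hc : PySem.Dict.contains st.2 v
    · rw [if_pos hc]; exact h
    · rw [if_neg hc]
      show PySem.Dict.get? (PySem.Dict.insert st.2 v lab) x = some w
      rw [PySem.Dict.get?_insert]
      by_cases hxv : x = v
      · subst hxv
        rw [PySem.Dict.contains_eq_isSome_get?, h] at hc
        exact absurd rfl hc
      · rw [if_neg hxv]; exact h

theorem pvBfs_mono (keysOf : PySem.Dict String (List (List String)))
    (bucket : PySem.Dict (List String) (List String)) (lab : String) :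
    ∀ (fuel : Nat) (stack : List String) (comp : PySem.Dict String String) (x w : String),
    PySem.Dict.get? comp x = some w →
    PySem.Dict.get? (pvBfs keysOf bucket lab fuel stack comp) x = some w := by
  intro fuel
  induction fuel with
  | zero => intro stack comp x w h; exact h
  | succ fuel ih =>
    intro stack comp x w h
    cases stack with
    | nil => exact h
    | cons t rest =>
      show PySem.Dict.get? (pvBfs keysOf bucket lab fuel
        (pvScan keysOf bucket lab t (rest, comp)).1 (pvScan keysOf bucket lab t (rest, comp)).2) x = some w
      apply ih
      rw [pvScan_eq]
      exact pvMarkFold_mono lab _ _ x w h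

-- the scanning loop: everything it marks is adjacent to t; the stack gains exactly
-- the new marks; the unlabelled count pays for every stack growth
theorem pvScanFold (lab : String) (ts : List String) (hnd : ts.Nodup) :
    ∀ (vs stack : List String) (comp : PySem.Dict String String),
    (∀ v ∈ vs, v ∈ ts) →
    (∀ x w, PySem.Dict.get? comp x = some w →
      PySem.Dict.get? (vs.foldl (pvMark lab) (stack, comp)).2 x = some w) ∧
    (∀ v ∈ stack, v ∈ (vs.foldl (pvMark lab) (stack, comp)).1) ∧
    (∀ v ∈ (vs.foldl (pvMark lab) (stack, comp)).1,
      v ∈ stack ∨ (PySem.Dict.get? (vs.foldl (pvMark lab) (stack, comp)).2 v = some lab ∧ v ∈ vs)) ∧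
    (∀ x w, PySem.Dict.get? (vs.foldl (pvMark lab) (stack, comp)).2 x = some w →
      PySem.Dict.get? comp x = some w ∨ (w = lab ∧ x ∈ vs)) ∧
    (∀ x, PySem.Dict.contains (vs.foldl (pvMark lab) (stack, comp)).2 x = true →
      PySem.Dict.contains comp x = true ∨ x ∈ (vs.foldl (pvMark lab) (stack, comp)).1) ∧
    (∀ v ∈ vs, PySem.Dict.contains (vs.foldl (pvMark lab) (stack, comp)).2 v = true) ∧
    ((vs.foldl (pvMark lab) (stack, comp)).1.length +
        pvCnt ts (vs.foldl (pvMark lab) (stack, comp)).2 = stack.length + pvCnt ts comp) := by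
  intro vs
  induction vs with
  | nil =>
    intro stack comp _
    exact ⟨fun x w h => h, fun v hv => hv, fun v hv => Or.inl hv,
      fun x w h => Or.inl h, fun x h => Or.inl h, fun v hv => absurd hv (List.not_mem_nil),
      rfl⟩
  | cons v vs ih =>
    intro stack comp hvs
    rw [List.foldl_cons]
    by_cases hc : PySem.Dict.contains comp v = true
    · have hred : pvMark lab (stack, comp) v = (stack, comp) := by
        unfold pvMark; rw [if_pos hc]
      rw [hred]
      obtain ⟨mono, stackold, stacknew, sound, soundstack, complete, meas⟩ :=
        ih stack comp (fun u hu => hvs u (List.mem_cons_of_mem _ hu))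
      refine ⟨mono, stackold, ?_, ?_, soundstack, ?_, meas⟩
      · intro u hu
        rcases stacknew u hu with h1 | ⟨h1, h2⟩
        · exact Or.inl h1
        · exact Or.inr ⟨h1, List.mem_cons_of_mem _ h2⟩
      · intro x w h
        rcases sound x w h with h1 | ⟨h1, h2⟩
        · exact Or.inl h1
        · exact Or.inr ⟨h1, List.mem_cons_of_mem _ h2⟩
      · intro u hu
        rcases List.mem_cons.mp hu with h1 | h1
        · subst h1
          rw [PySem.Dict.contains_eq_isSome_get?] at hc ⊢
          obtain ⟨w, hw⟩ := Option.isSome_iff_exists.mp hc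
          rw [mono u w hw]; rfl
        · exact complete u h1
    · have hc' : PySem.Dict.contains comp v = false := by
        cases h : PySem.Dict.contains comp v
        · rfl
        · exact absurd h hc
      have hred : pvMark lab (stack, comp) v = (v :: stack, PySem.Dict.insert comp v lab) := by
        unfold pvMark; rw [if_neg hc]
      rw [hred]
      obtain ⟨mono, stackold, stacknew, sound, soundstack, complete, meas⟩ :=
        ih (v :: stack) (PySem.Dict.insert comp v lab) (fun u hu => hvs u (List.mem_cons_of_mem _ hu))
      have hmono1 : ∀ x w, PySem.Dict.get? comp x = some w →
          PySem.Dict.get? (PySem.Dict.insert comp v lab) x = some w := by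
        intro x w h
        rw [PySem.Dict.get?_insert]
        by_cases hxv : x = v
        · subst hxv
          rw [PySem.Dict.contains_eq_isSome_get?, h] at hc'
          cases hc'
        · rw [if_neg hxv]; exact h
      refine ⟨?_, ?_, ?_, ?_, ?_, ?_, ?_⟩
      · intro x w h
        exact mono x w (hmono1 x w h)
      · intro u hu
        exact stackold u (List.mem_cons_of_mem _ hu)
      · intro u hu
        rcases stacknew u hu with h1 | ⟨h1, h2⟩
        · rcases List.mem_cons.mp h1 with h2 | h2
          · subst h2
            refine Or.inr ⟨?_, List.mem_cons_self⟩
            exact mono u lab (by rw [PySem.Dict.get?_insert, if_pos rfl])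
          · exact Or.inl h2
        · exact Or.inr ⟨h1, List.mem_cons_of_mem _ h2⟩
      · intro x w h
        rcases sound x w h with h1 | ⟨h1, h2⟩
        · rw [PySem.Dict.get?_insert] at h1
          by_cases hxv : x = v
          · rw [if_pos hxv] at h1
            injection h1 with h1
            exact Or.inr ⟨h1.symm, hxv ▸ List.mem_cons_self⟩
          · rw [if_neg hxv] at h1
            exact Or.inl h1
        · exact Or.inr ⟨h1, List.mem_cons_of_mem _ h2⟩
      · intro x h
        rcases soundstack x h with h1 | h1
        · rw [PySem.Dict.contains_insert] at h1
          by_cases hxv : x = v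
          · subst hxv
            exact Or.inr (stackold x List.mem_cons_self)
          · rw [beq_eq_false_iff_ne.mpr hxv, Bool.false_or] at h1
            exact Or.inl h1
        · exact Or.inr h1
      · intro u hu
        rcases List.mem_cons.mp hu with h1 | h1
        · subst h1
          rw [PySem.Dict.contains_eq_isSome_get?]
          rw [mono u lab (by rw [PySem.Dict.get?_insert, if_pos rfl])]; rfl
        · exact complete u h1
      · have hcnt := @pvCnt_insert ts comp v lab (hvs v List.mem_cons_self) hnd hc'
        rw [meas]
        simp only [List.length_cons]
        omega

-- the while loop: sound (every label traces back to team) and complete (the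
-- labelled set is closed under adjacency when the stack empties inside the fuel)
theorem pvBfs_spec (keysOf : PySem.Dict String (List (List String)))
    (bucket : PySem.Dict (List String) (List String)) (lab team : String)
    (ts : List String) (comp0 : PySem.Dict String String) (hnd : ts.Nodup)
    (hbd : ∀ k v, v ∈ PySem.Dict.getD bucket k [] → v ∈ ts)
    (hNA : ∀ t ∈ ts, ∀ v,
      ((∃ k, k ∈ PySem.Dict.getD keysOf t [] ∧ v ∈ PySem.Dict.getD bucket k []) ↔ PvAdj bucket t v)) :
    ∀ (fuel : Nat) (stack : List String) (comp : PySem.Dict String String),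
    (∀ v ∈ stack, PySem.Dict.get? comp v = some lab ∧ v ∈ ts ∧ PvConn bucket team v) →
    (∀ x y, PySem.Dict.contains comp x = true → PvAdj bucket x y →
      PySem.Dict.contains comp y = true ∨ x ∈ stack) →
    (∀ x w, PySem.Dict.get? comp x = some w →
      PySem.Dict.get? comp0 x = some w ∨ (w = lab ∧ PvConn bucket team x)) →
    stack.length + pvCnt ts comp ≤ fuel →
    (∀ x w, PySem.Dict.get? (pvBfs keysOf bucket lab fuel stack comp) x = some w →
      PySem.Dict.get? comp0 x = some w ∨ (w = lab ∧ PvConn bucket team x)) ∧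
    (∀ x y, PySem.Dict.contains (pvBfs keysOf bucket lab fuel stack comp) x = true →
      PvAdj bucket x y →
      PySem.Dict.contains (pvBfs keysOf bucket lab fuel stack comp) y = true) := by
  intro fuel
  induction fuel with
  | zero =>
    intro stack comp hstack hfront hsound hfuel
    have hstacknil : stack = [] := by
      cases stack with
      | nil => rfl
      | cons a b => simp at hfuel
    subst hstacknil
    refine ⟨hsound, ?_⟩
    intro x y hx hadj
    rcases hfront x y hx hadj with h | h
    · exact h
    · cases h
  | succ fuel ih =>
    intro stack comp hstack hfront hsound hfuel
    cases stack with
    | nil =>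
      refine ⟨hsound, ?_⟩
      intro x y hx hadj
      rcases hfront x y hx hadj with h | h
      · exact h
      · cases h
    | cons t rest =>
      have hstepeq : pvBfs keysOf bucket lab (fuel + 1) (t :: rest) comp
          = pvBfs keysOf bucket lab fuel
              ((((PySem.Dict.getD keysOf t []).flatMap (fun k => PySem.Dict.getD bucket k [])).foldl (pvMark lab) (rest, comp)).1)
              ((((PySem.Dict.getD keysOf t []).flatMap (fun k => PySem.Dict.getD bucket k [])).foldl (pvMark lab) (rest, comp)).2) := by
        show pvBfs keysOf bucket lab fuel (pvScan keysOf bucket lab t (rest, comp)).1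
          (pvScan keysOf bucket lab t (rest, comp)).2 = _
        rw [pvScan_eq]
      rw [hstepeq]
      obtain ⟨hgt, hts, hconnT⟩ := hstack t List.mem_cons_self
      have hvsts : ∀ v ∈ (PySem.Dict.getD keysOf t []).flatMap (fun k => PySem.Dict.getD bucket k []), v ∈ ts := by
        intro v hv
        obtain ⟨k, _, hvk⟩ := List.mem_flatMap.mp hv
        exact hbd k v hvk
      have hvsAdj : ∀ v ∈ (PySem.Dict.getD keysOf t []).flatMap (fun k => PySem.Dict.getD bucket k []), PvAdj bucket t v := by
        intro v hv
        obtain ⟨k, hk, hvk⟩ := List.mem_flatMap.mp hv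
        exact (hNA t hts v).mp ⟨k, hk, hvk⟩
      have hAdjvs : ∀ y, PvAdj bucket t y →
          y ∈ (PySem.Dict.getD keysOf t []).flatMap (fun k => PySem.Dict.getD bucket k []) := by
        intro y hy
        obtain ⟨k, hk, hyk⟩ := (hNA t hts y).mpr hy
        exact List.mem_flatMap.mpr ⟨k, hk, hyk⟩
      obtain ⟨mono, stackold, stacknew, sound, soundstack, complete, meas⟩ :=
        pvScanFold lab ts hnd ((PySem.Dict.getD keysOf t []).flatMap (fun k => PySem.Dict.getD bucket k []))
          rest comp hvsts
      apply ih
      · intro v hv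
        rcases stacknew v hv with h1 | ⟨h1, h2⟩
        · obtain ⟨hv1, hv2, hv3⟩ := hstack v (List.mem_cons_of_mem _ h1)
          exact ⟨mono v lab hv1, hv2, hv3⟩
        · exact ⟨h1, hvsts v h2, Relation.ReflTransGen.tail hconnT (hvsAdj v h2)⟩
      · intro x y hx hadj
        rcases soundstack x hx with h1 | h1
        · rcases hfront x y h1 hadj with h2 | h2
          · left
            rw [PySem.Dict.contains_eq_isSome_get?] at h2 ⊢
            obtain ⟨w, hw⟩ := Option.isSome_iff_exists.mp h2
            rw [mono y w hw]; rfl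
          · rcases List.mem_cons.mp h2 with h3 | h3
            · subst h3
              left
              exact complete y (hAdjvs y hadj)
            · exact Or.inr (stackold x h3)
        · exact Or.inr h1
      · intro x w h
        rcases sound x w h with h1 | ⟨h1, h2⟩
        · exact hsound x w h1
        · exact Or.inr ⟨h1, Relation.ReflTransGen.tail hconnT (hvsAdj x h2)⟩
      · rw [meas]
        simp only [List.length_cons] at hfuel
        omega

-- comp closed under adjacency reaches along any path
theorem pvClosed_reach {bucket : PySem.Dict (List String) (List String)}
    {comp : PySem.Dict String String}
    (hclosed : ∀ x y, PySem.Dict.contains comp x = true → PvAdj bucket x y →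
      PySem.Dict.contains comp y = true)
    {x y : String} (hx : PySem.Dict.contains comp x = true) (h : PvConn bucket x y) :
    PySem.Dict.contains comp y = true := by
  induction h with
  | refl => exact hx
  | tail _ hadj ih => exact hclosed _ _ ih hadj

-- one DFS run from an unlabelled team: the whole component gets the label,
-- nothing else changes, closure under adjacency is restored
theorem pvBfs_run (keysOf : PySem.Dict String (List (List String)))
    (bucket : PySem.Dict (List String) (List String)) (lab team : String)
    (ts : List String) (comp0 : PySem.Dict String String) (fuel : Nat) (hnd : ts.Nodup)
    (hbd : ∀ k v, v ∈ PySem.Dict.getD bucket k [] → v ∈ ts)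
    (hNA : ∀ t ∈ ts, ∀ v,
      ((∃ k, k ∈ PySem.Dict.getD keysOf t [] ∧ v ∈ PySem.Dict.getD bucket k []) ↔ PvAdj bucket t v))
    (hteam : team ∈ ts) (hdisj : PySem.Dict.contains comp0 team = false)
    (hclosed : ∀ x y, PySem.Dict.contains comp0 x = true → PvAdj bucket x y →
      PySem.Dict.contains comp0 y = true)
    (hfuel : ts.length + 1 ≤ fuel) :
    (∀ x, PvConn bucket team x →
      PySem.Dict.get? (pvBfs keysOf bucket lab fuel [team] (PySem.Dict.insert comp0 team lab)) x = some lab) ∧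
    (∀ x, ¬ PvConn bucket team x →
      PySem.Dict.get? (pvBfs keysOf bucket lab fuel [team] (PySem.Dict.insert comp0 team lab)) x =
        PySem.Dict.get? comp0 x) ∧
    (∀ x y, PySem.Dict.contains (pvBfs keysOf bucket lab fuel [team] (PySem.Dict.insert comp0 team lab)) x = true →
      PvAdj bucket x y →
      PySem.Dict.contains (pvBfs keysOf bucket lab fuel [team] (PySem.Dict.insert comp0 team lab)) y = true) := by
  have hnoconn : ∀ x, PySem.Dict.contains comp0 x = true → ¬ PvConn bucket team x := by
    intro x hx hc
    have := pvClosed_reach hclosed hx (pvConn_symm hc)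
    rw [hdisj] at this
    cases this
  obtain ⟨sound0, closure⟩ := pvBfs_spec keysOf bucket lab team ts comp0 hnd hbd hNA
    fuel [team] (PySem.Dict.insert comp0 team lab)
    (by
      intro v hv
      rw [List.mem_singleton] at hv
      subst hv
      exact ⟨by rw [PySem.Dict.get?_insert, if_pos rfl], hteam, Relation.ReflTransGen.refl⟩)
    (by
      intro x y hx hadj
      rw [PySem.Dict.contains_insert] at hx
      by_cases hxt : x = team
      · exact Or.inr (by rw [hxt]; exact List.mem_singleton.mpr rfl)
      · rw [beq_eq_false_iff_ne.mpr hxt, Bool.false_or] at hx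
        left
        rw [PySem.Dict.contains_insert, hclosed x y hx hadj, Bool.or_true])
    (by
      intro x w h
      rw [PySem.Dict.get?_insert] at h
      by_cases hxt : x = team
      · rw [if_pos hxt] at h
        injection h with h
        exact Or.inr ⟨h.symm, hxt ▸ Relation.ReflTransGen.refl⟩
      · rw [if_neg hxt] at h
        exact Or.inl h)
    (by
      have := pvCnt_le ts (PySem.Dict.insert comp0 team lab)
      simp only [List.length_singleton]
      omega)
  have hCt : PySem.Dict.get? (pvBfs keysOf bucket lab fuel [team] (PySem.Dict.insert comp0 team lab)) team = some lab :=
    pvBfs_mono keysOf bucket lab fuel [team] _ team lab (by rw [PySem.Dict.get?_insert, if_pos rfl])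
  have hconnC : ∀ x, PvConn bucket team x →
      PySem.Dict.contains (pvBfs keysOf bucket lab fuel [team] (PySem.Dict.insert comp0 team lab)) x = true := by
    intro x hc
    induction hc with
    | refl => rw [PySem.Dict.contains_eq_isSome_get?, hCt]; rfl
    | tail _ hadj ih => exact closure _ _ ih hadj
  refine ⟨?_, ?_, closure⟩
  · intro x hc
    have hx := hconnC x hc
    rw [PySem.Dict.contains_eq_isSome_get?] at hx
    obtain ⟨w, hw⟩ := Option.isSome_iff_exists.mp hx
    rcases sound0 x w hw with h1 | ⟨h1, _⟩
    · exact absurd hc (hnoconn x (by rw [PySem.Dict.contains_eq_isSome_get?, h1]; rfl))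
    · rw [hw, h1]
  · intro x hnc
    cases hq : PySem.Dict.get? (pvBfs keysOf bucket lab fuel [team] (PySem.Dict.insert comp0 team lab)) x with
    | some w =>
      rcases sound0 x w hq with h1 | ⟨_, h2⟩
      · rw [h1]
      · exact absurd h2 hnc
    | none =>
      cases hq0 : PySem.Dict.get? comp0 x with
      | none => rfl
      | some w =>
        have hxt : x ≠ team := by
          intro e
          exact hnc (e ▸ Relation.ReflTransGen.refl)
        have := pvBfs_mono keysOf bucket lab fuel [team] (PySem.Dict.insert comp0 team lab) x w
          (by rw [PySem.Dict.get?_insert, if_neg hxt]; exact hq0)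
        rw [hq] at this
        cases this

-- the cluster map of B's outer loop only grows
theorem pvBFold_mono (keysOf : PySem.Dict String (List (List String)))
    (bucket : PySem.Dict (List String) (List String)) (fuel : Nat) :
    ∀ (rest : List String) (n : Nat) (comp : PySem.Dict String String) (x w : String),
    PySem.Dict.get? comp x = some w →
    PySem.Dict.get? ((rest.foldl (fun (st : Nat × PySem.Dict String String) team =>
        if PySem.Dict.contains st.2 team then st
        else (st.1 + 1, pvBfs keysOf bucket ("cluster_" ++ PySem.Int.toStr (st.1 : Int)) fuel [team]
          (PySem.Dict.insert st.2 team ("cluster_" ++ PySem.Int.toStr (st.1 : Int))))) (n, comp)).2) x = some w := by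
  intro rest
  induction rest with
  | nil => intro n comp x w h; exact h
  | cons team rest ih =>
    intro n comp x w h
    rw [List.foldl_cons]
    by_cases hc : PySem.Dict.contains comp team = true
    · rw [if_pos hc]
      exact ih n comp x w h
    · rw [if_neg hc]
      apply ih
      apply pvBfs_mono
      rw [PySem.Dict.get?_insert]
      by_cases hxt : x = team
      · subst hxt
        rw [PySem.Dict.contains_eq_isSome_get?, h] at hc
        exact absurd rfl hc
      · rw [if_neg hxt]; exact h

-- the two labelling loops assign identical labels: A keys its memo by union-find
-- root, B pre-labels whole components by DFS; both number classes in sorted order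
theorem pvFinal3
    (pF : PySem.Dict String String) (rkF : PySem.Dict String Nat)
    (keysOf : PySem.Dict String (List (List String)))
    (bucket : PySem.Dict (List String) (List String))
    (tsAll : List String) (fuel : Nat)
    (hdomF : ∀ z, PySem.Dict.contains pF z = true ↔ z ∈ tsAll)
    (hker : ∀ x ∈ tsAll, ∀ y ∈ tsAll, (PvEqv pF x y ↔ PvConn bucket x y))
    (hndAll : tsAll.Nodup)
    (hbd : ∀ k v, v ∈ PySem.Dict.getD bucket k [] → v ∈ tsAll)
    (hNA : ∀ t ∈ tsAll, ∀ v,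
      ((∃ k, k ∈ PySem.Dict.getD keysOf t [] ∧ v ∈ PySem.Dict.getD bucket k []) ↔ PvAdj bucket t v))
    (hfuel : tsAll.length + 1 ≤ fuel) :
    ∀ (rest : List String) (pA : PySem.Dict String String)
      (rtcA clA : PySem.Dict String String) (n : Nat) (comp : PySem.Dict String String),
    PvUF pA rkF →
    (∀ z, PySem.Dict.contains pA z = PySem.Dict.contains pF z) →
    (∀ z s, PvRoot pA z s ↔ PvRoot pF z s) →
    (∀ x ∈ rest, x ∈ tsAll) →
    rest.Nodup →
    (∀ t ∈ rest, PySem.Dict.contains clA t = false) →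
    (∀ x ∈ tsAll, ∀ s, PvRoot pF x s → PySem.Dict.get? rtcA s = PySem.Dict.get? comp x) →
    PySem.Dict.size rtcA = n →
    (∀ x y, PySem.Dict.contains comp x = true → PvAdj bucket x y →
      PySem.Dict.contains comp y = true) →
    PySem.Dict.items ((rest.foldl (fun st2 team =>
        ((pvFind st2.1 rkF team).2,
         (if PySem.Dict.contains st2.2.1 (pvFind st2.1 rkF team).1 then st2.2.1
          else PySem.Dict.insert st2.2.1 (pvFind st2.1 rkF team).1
            ("cluster_" ++ PySem.Int.toStr (PySem.Dict.size st2.2.1 : Int))),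
         PySem.Dict.insert st2.2.2 team
           (PySem.Dict.getD (if PySem.Dict.contains st2.2.1 (pvFind st2.1 rkF team).1 then st2.2.1
              else PySem.Dict.insert st2.2.1 (pvFind st2.1 rkF team).1
                ("cluster_" ++ PySem.Int.toStr (PySem.Dict.size st2.2.1 : Int)))
             (pvFind st2.1 rkF team).1 ""))) (pA, rtcA, clA)).2.2) =
    PySem.Dict.items clA ++ rest.map (fun t => (t,
      PySem.Dict.getD ((rest.foldl (fun (st : Nat × PySem.Dict String String) team =>
        if PySem.Dict.contains st.2 team then st
        else (st.1 + 1, pvBfs keysOf bucket ("cluster_" ++ PySem.Int.toStr (st.1 : Int)) fuel [team]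
          (PySem.Dict.insert st.2 team ("cluster_" ++ PySem.Int.toStr (st.1 : Int))))) (n, comp)).2) t "")) := by
  intro rest
  induction rest with
  | nil =>
    intro pA rtcA clA n comp _ _ _ _ _ _ _ _ _
    simp
  | cons team rest ih =>
    intro pA rtcA clA n comp hufA hcontA hrootsA hrest hnd hclA hrel hsize hclosed
    have hteam_ts : team ∈ tsAll := hrest team List.mem_cons_self
    have hcteamA : PySem.Dict.contains pA team = true := by
      rw [hcontA]; exact (hdomF team).mpr hteam_ts
    obtain ⟨hrootT, hufA', hiffA', hcontA'⟩ := pvFind_spec hufA hcteamA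
    have hrootTF : PvRoot pF team (pvFind pA rkF team).1 := (hrootsA _ _).mp hrootT
    have hgetr : PySem.Dict.get? rtcA (pvFind pA rkF team).1 = PySem.Dict.get? comp team :=
      hrel team hteam_ts _ hrootTF
    rw [List.nodup_cons] at hnd
    simp only [List.foldl_cons, List.map_cons]
    by_cases hcb : PySem.Dict.contains comp team = true
    · -- team's component was already labelled
      have hsome : (PySem.Dict.get? comp team).isSome = true := by
        rw [← PySem.Dict.contains_eq_isSome_get?]; exact hcb
      obtain ⟨l0, hl0⟩ := Option.isSome_iff_exists.mp hsome
      have hrtc : PySem.Dict.contains rtcA (pvFind pA rkF team).1 = true := by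
        rw [PySem.Dict.contains_eq_isSome_get?, hgetr, hl0]; rfl
      simp only [hrtc, if_true, hcb]
      have hval : PySem.Dict.getD rtcA (pvFind pA rkF team).1 "" = l0 := by
        rw [PySem.Dict.getD_eq_get?_getD, hgetr, hl0]; rfl
      rw [hval]
      have hitems : PySem.Dict.items (PySem.Dict.insert clA team l0) =
          PySem.Dict.items clA ++ [(team, l0)] :=
        PySem.Dict.items_insert_of_not_contains clA l0 (hclA team List.mem_cons_self)
      rw [ih (pvFind pA rkF team).2 rtcA (PySem.Dict.insert clA team l0) n comp hufA'
        (fun z => (hcontA' z).trans (hcontA z))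
        (fun z s => (hiffA' z s).trans (hrootsA z s))
        (fun x hx => hrest x (List.mem_cons_of_mem _ hx))
        hnd.2
        (by
          intro t ht
          rw [PySem.Dict.contains_insert, beq_eq_false_iff_ne.mpr (fun e => hnd.1 (by rw [← e]; exact ht)),
            Bool.false_or]
          exact hclA t (List.mem_cons_of_mem _ ht))
        hrel hsize hclosed]
      rw [hitems]
      have hgfin : PySem.Dict.getD ((rest.foldl (fun (st : Nat × PySem.Dict String String) team =>
          if PySem.Dict.contains st.2 team then st
          else (st.1 + 1, pvBfs keysOf bucket ("cluster_" ++ PySem.Int.toStr (st.1 : Int)) fuel [team]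
            (PySem.Dict.insert st.2 team ("cluster_" ++ PySem.Int.toStr (st.1 : Int))))) (n, comp)).2) team "" = l0 := by
        rw [PySem.Dict.getD_eq_get?_getD, pvBFold_mono keysOf bucket fuel rest n comp team l0 hl0]; rfl
      rw [hgfin, List.append_assoc, List.singleton_append]
    · -- a fresh component: A mints a label at the root, B labels it by DFS
      have hcb' : PySem.Dict.contains comp team = false := by
        cases h : PySem.Dict.contains comp team
        · rfl
        · exact absurd h hcb
      have hgn : PySem.Dict.get? comp team = none := by
        cases hq : PySem.Dict.get? comp team with
        | none => rfl
        | some w => rw [PySem.Dict.contains_eq_isSome_get?, hq] at hcb'; cases hcb'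
      have hrtc : PySem.Dict.contains rtcA (pvFind pA rkF team).1 = false := by
        rw [PySem.Dict.contains_eq_isSome_get?, hgetr, hgn]; rfl
      simp only [hrtc, Bool.false_eq_true, if_false, hcb', hsize]
      obtain ⟨R1, R2, R3⟩ := pvBfs_run keysOf bucket ("cluster_" ++ PySem.Int.toStr (n : Int))
        team tsAll comp fuel hndAll hbd hNA hteam_ts hcb' hclosed hfuel
      have hval : PySem.Dict.getD
          (PySem.Dict.insert rtcA (pvFind pA rkF team).1 ("cluster_" ++ PySem.Int.toStr (n : Int)))
          (pvFind pA rkF team).1 "" = "cluster_" ++ PySem.Int.toStr (n : Int) := by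
        rw [PySem.Dict.getD_insert, if_pos rfl]
      rw [hval]
      have hitems : PySem.Dict.items (PySem.Dict.insert clA team ("cluster_" ++ PySem.Int.toStr (n : Int))) =
          PySem.Dict.items clA ++ [(team, "cluster_" ++ PySem.Int.toStr (n : Int))] :=
        PySem.Dict.items_insert_of_not_contains clA _ (hclA team List.mem_cons_self)
      rw [ih (pvFind pA rkF team).2
        (PySem.Dict.insert rtcA (pvFind pA rkF team).1 ("cluster_" ++ PySem.Int.toStr (n : Int)))
        (PySem.Dict.insert clA team ("cluster_" ++ PySem.Int.toStr (n : Int)))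
        (n + 1)
        (pvBfs keysOf bucket ("cluster_" ++ PySem.Int.toStr (n : Int)) fuel [team]
          (PySem.Dict.insert comp team ("cluster_" ++ PySem.Int.toStr (n : Int))))
        hufA'
        (fun z => (hcontA' z).trans (hcontA z))
        (fun z s => (hiffA' z s).trans (hrootsA z s))
        (fun x hx => hrest x (List.mem_cons_of_mem _ hx))
        hnd.2
        (by
          intro t ht
          rw [PySem.Dict.contains_insert, beq_eq_false_iff_ne.mpr (fun e => hnd.1 (by rw [← e]; exact ht)),
            Bool.false_or]
          exact hclA t (List.mem_cons_of_mem _ ht))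
        (by
          intro x hx s hxs
          rw [PySem.Dict.get?_insert]
          by_cases hsr : s = (pvFind pA rkF team).1
          · rw [if_pos hsr]
            have hconn : PvConn bucket team x := by
              apply pvConn_symm
              rw [← hker x hx team hteam_ts]
              exact ⟨(pvFind pA rkF team).1, hsr ▸ hxs, hrootTF⟩
            rw [R1 x hconn]
          · rw [if_neg hsr]
            have hnconn : ¬ PvConn bucket team x := by
              intro hc
              have heqv : PvEqv pF x team := (hker x hx team hteam_ts).mpr (pvConn_symm hc)
              obtain ⟨r', hxr', htr'⟩ := heqv
              exact hsr ((pvRoot_det hxs hxr').trans (pvRoot_det htr' hrootTF))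
            rw [R2 x hnconn]
            exact hrel x hx s hxs)
        (by rw [PySem.Dict.size_insert, hrtc, hsize]; rfl)
        R3]
      rw [hitems]
      have hgfin : PySem.Dict.getD ((rest.foldl (fun (st : Nat × PySem.Dict String String) team =>
          if PySem.Dict.contains st.2 team then st
          else (st.1 + 1, pvBfs keysOf bucket ("cluster_" ++ PySem.Int.toStr (st.1 : Int)) fuel [team]
            (PySem.Dict.insert st.2 team ("cluster_" ++ PySem.Int.toStr (st.1 : Int))))) (n + 1,
              pvBfs keysOf bucket ("cluster_" ++ PySem.Int.toStr (n : Int)) fuel [team]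
                (PySem.Dict.insert comp team ("cluster_" ++ PySem.Int.toStr (n : Int))))).2) team ""
          = "cluster_" ++ PySem.Int.toStr (n : Int) := by
        rw [PySem.Dict.getD_eq_get?_getD,
          pvBFold_mono keysOf bucket fuel rest (n + 1) _ team _ (R1 team Relation.ReflTransGen.refl)]
        rfl
      rw [hgfin, List.append_assoc, List.singleton_append]

-- ===== VERDICT (by name: the statement is the Claim_ definition above) =====
set_option maxHeartbeats 2000000 in
theorem core_cluster_teams_spec : Claim_equal_core_cluster_teams := by
  intro l _hdom hpre
  unfold Pre_core_cluster_teams at hpre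
  unfold Spec_core_cluster_teams
  show core_cluster_teams l = core_cluster_teams_alt l
  unfold core_cluster_teams core_cluster_teams_alt
  set F := l.foldl (fun st pr =>
        ((pvComb 4 (PySem.List.sorted pr.2 (fun s => s) false)).foldl
          (fun st2 key =>
            (((PySem.Dict.getD st2.2.2 key []).foldl (fun q other => pvUnion q.1 q.2 pr.1 other) (st2.1, st2.2.1)).1,
             ((PySem.Dict.getD st2.2.2 key []).foldl (fun q other => pvUnion q.1 q.2 pr.1 other) (st2.1, st2.2.1)).2,
             PySem.Dict.modify st2.2.2 key [] (fun l2 => l2 ++ [pr.1])))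
          ((pvAdd st.1 st.2.1 pr.1).1, (pvAdd st.1 st.2.1 pr.1).2, st.2.2)))
        (PySem.Dict.empty, PySem.Dict.empty, PySem.Dict.empty) with hF
  set B := l.foldl (fun st pr =>
        ((PySem.Dict.insert st.1 pr.1 (pvComb 4 (PySem.List.sorted pr.2 (fun s => s) false))),
         (pvComb 4 (PySem.List.sorted pr.2 (fun s => s) false)).foldl
           (fun b k => PySem.Dict.modify b k [] (fun l2 => l2 ++ [pr.1])) st.2))
        (PySem.Dict.empty, PySem.Dict.empty) with hB
  have hsim := pvMain2 l PySem.Dict.empty PySem.Dict.empty PySem.Dict.empty [] pvSim2_init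
    (fun q _ h => absurd h (List.not_mem_nil)) hpre
  rw [List.nil_append, ← hF] at hsim
  have hidx : F.2.2 = pvBucketF l := by rw [hF]; exact pvProjA l _
  rw [hidx] at hsim
  have hkof : B.1 = pvKeysOfF l := by rw [hB]; exact pvProjB1 l _
  have hbuck : B.2 = pvBucketF l := by rw [hB]; exact pvProjB2 l _
  have hNA : ∀ t ∈ l.map (fun q => q.1), ∀ v,
      ((∃ k, k ∈ PySem.Dict.getD (pvKeysOfF l) t [] ∧ v ∈ PySem.Dict.getD (pvBucketF l) k []) ↔
        PvAdj (pvBucketF l) t v) := by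
    intro t ht v
    obtain ⟨pr, hpr, hfst⟩ := List.mem_map.mp ht
    have hmemt : (t, pr.2) ∈ l := by
      rw [← hfst]
      simpa using hpr
    have hk : PySem.Dict.getD (pvKeysOfF l) t [] = pvKeys pr.2 := by
      unfold pvKeysOfF
      rw [PySem.Dict.getD_eq_get?_getD, pvKeysOfF_get l PySem.Dict.empty hpre t pr.2 hmemt]
      rfl
    constructor
    · rintro ⟨k, hk1, hk2⟩
      refine ⟨k, ?_, hk2⟩
      rw [hk] at hk1
      exact (pvBucketF_mem l k t).mpr ⟨pr.2, hmemt, hk1⟩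
    · rintro ⟨k, hk1, hk2⟩
      obtain ⟨sp', hsp', hksp'⟩ := (pvBucketF_mem l k t).mp hk1
      have hspq : sp' = pr.2 := pvUniqSp l hpre t sp' pr.2 hsp' hmemt
      exact ⟨k, by rw [hk, ← hspq]; exact hksp', hk2⟩
  have hsub : ∀ x ∈ PySem.List.sorted (l.map (fun q => q.1)) (fun s => s) false,
      x ∈ l.map (fun q => q.1) := by
    intro x hx
    exact (PySem.List.mem_sorted _ _ _ _).mp hx
  have hndS : (PySem.List.sorted (l.map (fun q => q.1)) (fun s => s) false).Nodup :=
    ((PySem.List.sorted_perm _ _ _).symm.nodup) hpre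
  have hfin := pvFinal3 F.1 F.2.1 B.1 B.2 (l.map (fun q => q.1)) (l.length + 1)
    hsim.domp
    (by rw [hbuck]; exact hsim.kernel)
    hpre
    (by rw [hbuck]; exact hsim.bdom)
    (by rw [hkof, hbuck]; exact hNA)
    (by rw [List.length_map])
    (PySem.List.sorted (l.map (fun q => q.1)) (fun s => s) false)
    F.1 PySem.Dict.empty PySem.Dict.empty 0 PySem.Dict.empty
    hsim.uf
    (fun z => rfl)
    (fun z s => Iff.rfl)
    hsub
    hndS
    (fun t _ => by rw [PySem.Dict.contains_empty])
    (fun x _ s _ => by rw [PySem.Dict.get?_empty, PySem.Dict.get?_empty])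
    (by rw [PySem.Dict.size_empty])
    (fun x y hx _ => by rw [PySem.Dict.contains_empty] at hx; cases hx)
  rw [show PySem.Dict.items (PySem.Dict.empty : PySem.Dict String String) = [] from rfl,
    List.nil_append] at hfin
  exact hfin
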